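-- pv_equiv track=rewrite | github.com/kyungheee/Data-structure-and-Algorithms | day-10/devzoe/미로_탈출.py | solution
-- ===== SOURCE A (Python) =====
-- from collections import deque
--
-- def solution(maps):
--     n, m = len(maps), len(maps[0])
--     visited = [[[False] * 2 for _ in range(m)] for _ in range(n)]
--     directions = [(-1, 0), (1, 0), (0, -1), (0, 1)]
--     queue = deque([(i, j, 0, 0) for i in range(n) for j in range(m) if maps[i][j] == "S"])
--     for i, j, _, _ in queue:
--         visited[i][j][0] = True
--     while queue:
--         y, x, passed_L, steps = queue.popleft()
--         if maps[y][x] == "E" and passed_L: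
--             return steps
--         for dy, dx in directions:
--             ny, nx = y + dy, x + dx
--             if 0 <= ny < n and 0 <= nx < m and maps[ny][nx] != "X" and not visited[ny][nx][passed_L]:
--                 next_passed_L = passed_L or maps[ny][nx] == "L"
--                 visited[ny][nx][next_passed_L] = True
--                 queue.append((ny, nx, next_passed_L, steps + 1))
--     return -1
-- ===== SOURCE B (Python) =====
-- def solution(maps):
--     n, m = len(maps), len(maps[0])
--
--     def bfs(sources):
--         dist = {c: 0 for c in sources}
--         frontier = list(sources)
--         d = 0
--         while frontier:
--             d += 1
--             nxt = []
--             for (y, x) in frontier: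
--                 for (ny, nx) in ((y - 1, x), (y + 1, x), (y, x - 1), (y, x + 1)):
--                     if 0 <= ny < n and 0 <= nx < m and maps[ny][nx] != "X" and (ny, nx) not in dist:
--                         dist[(ny, nx)] = d
--                         nxt.append((ny, nx))
--             frontier = nxt
--         return dist
--
--     dS = bfs([(i, j) for i in range(n) for j in range(m) if maps[i][j] == "S"])
--     dE = bfs([(i, j) for i in range(n) for j in range(m) if maps[i][j] == "E"])
--     best = -1
--     for (i, j), ds in dS.items():
--         if maps[i][j] == "L" and (i, j) in dE:
--             t = ds + dE[(i, j)]
--             if best == -1 or t < best: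
--                 best = t
--     return best
-- ===== Notes on version B (the rewrite author's own statement) =====
-- stated objective: alternative
-- what changed: A runs a single BFS over the product state (cell, lever-passed?) with a per-state visited table and an in-queue early return; B instead runs two plain multi-source BFS distance fields (from all S cells and from all E cells) over the X-free grid and returns the minimum of dS[c]+dE[c] over lever cells c reachable in both, -1 if none.
import Mathlib
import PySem

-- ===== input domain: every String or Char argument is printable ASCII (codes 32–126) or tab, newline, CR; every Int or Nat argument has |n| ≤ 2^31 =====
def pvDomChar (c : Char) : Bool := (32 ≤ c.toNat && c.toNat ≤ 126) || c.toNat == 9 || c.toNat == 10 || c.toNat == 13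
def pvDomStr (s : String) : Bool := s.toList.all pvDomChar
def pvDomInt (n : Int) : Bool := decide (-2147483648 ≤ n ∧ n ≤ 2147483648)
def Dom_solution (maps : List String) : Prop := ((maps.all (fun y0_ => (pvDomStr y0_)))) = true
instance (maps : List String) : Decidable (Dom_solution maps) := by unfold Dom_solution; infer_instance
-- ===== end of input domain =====

-- B replaces A's single product-state (cell × lever-passed) BFS by two plain multi-source BFS
-- distance fields combined by a minimum over lever cells (objective: alternative).

-- ===== PORT A =====

-- maps[y][x] as a Char; '?' default is only reachable out of bounds (all uses are bounds-guarded)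
def pvCell (maps : List String) (y x : Int) : Char :=
  (PySem.List.pyGet? ((PySem.List.pyGet? maps y).getD "").toList x).getD '?'

def pvDirs : List (Int × Int) := [(-1, 0), (1, 0), (0, -1), (0, 1)]

-- visited[y][x][p], as a Boolean table (function representation of A's nested lists)
def pvSetV (v : Int × Int → Bool → Bool) (y x : Int) (p : Bool) : Int × Int → Bool → Bool :=
  fun c q => if c = (y, x) ∧ q = p then true else v c q

-- queue entries (y, x, passed_L, steps)
-- the body of A's inner `for dy, dx in directions` loop
def pvAStep (maps : List String) (n m : Int) (y x : Int) (p : Bool) (k : Int)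
    (acc : List (Int × Int × Bool × Int) × (Int × Int → Bool → Bool)) (d : Int × Int) :
    List (Int × Int × Bool × Int) × (Int × Int → Bool → Bool) :=
  let ny := y + d.1
  let nx := x + d.2
  if 0 ≤ ny ∧ ny < n ∧ 0 ≤ nx ∧ nx < m ∧ pvCell maps ny nx ≠ 'X' ∧ acc.2 (ny, nx) p = false then
    let p' := p || (pvCell maps ny nx == 'L')
    (acc.1 ++ [(ny, nx, p', k + 1)], pvSetV acc.2 ny nx p')
  else acc

def pvStepDirs (maps : List String) (n m : Int) (y x : Int) (p : Bool) (k : Int)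
    (acc0 : List (Int × Int × Bool × Int) × (Int × Int → Bool → Bool)) :
    List (Int × Int × Bool × Int) × (Int × Int → Bool → Bool) :=
  pvDirs.foldl (pvAStep maps n m y x p k) acc0

-- in-bounds grid cells (for the termination measure)
def pvCells (n m : Int) : Finset (Int × Int) :=
  (Finset.range n.toNat ×ˢ Finset.range m.toNat).image (fun p => ((p.1 : Int), (p.2 : Int)))

def pvU (n m : Int) (v : Int × Int → Bool → Bool) (p : Bool) : Nat :=
  ((pvCells n m).filter (fun c => v c p = false)).card

def pvQn (q : List (Int × Int × Bool × Int)) (p : Bool) : Nat :=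
  (q.filter (fun e => e.2.2.1 == p)).length

def pvMeas (n m : Int) (q : List (Int × Int × Bool × Int)) (v : Int × Int → Bool → Bool) : Nat :=
  6 * (5 * pvU n m v false + pvQn q false) + (pvU n m v true + pvQn q true)

lemma pvU_set_le (n m : Int) (v : Int × Int → Bool → Bool) (y x : Int) (p p' : Bool) :
    pvU n m (pvSetV v y x p) p' ≤ pvU n m v p' := by
  apply Finset.card_le_card
  intro c hc
  simp only [Finset.mem_filter, pvSetV] at hc ⊢
  refine ⟨hc.1, ?_⟩
  by_cases h : c = (y, x) ∧ p' = p
  · simp [h] at hc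
  · rw [if_neg h] at hc; exact hc.2

lemma pvU_set_lt (n m : Int) (v : Int × Int → Bool → Bool) (y x : Int) (p : Bool)
    (hmem : (y, x) ∈ pvCells n m) (hv : v (y, x) p = false) :
    pvU n m (pvSetV v y x p) p < pvU n m v p := by
  apply Finset.card_lt_card
  constructor
  · intro c hc
    simp only [Finset.mem_filter, pvSetV] at hc ⊢
    refine ⟨hc.1, ?_⟩
    by_cases h : c = (y, x)
    · simp [h] at hc
    · simp only [h, false_and, if_false] at hc
      exact hc.2
  · intro hsub
    have := hsub (Finset.mem_filter.mpr ⟨hmem, hv⟩)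
    simp [pvSetV, Finset.mem_filter] at this

lemma pvU_set_succ_le (n m : Int) (v : Int × Int → Bool → Bool) (y x : Int) (p : Bool)
    (hmem : (y, x) ∈ pvCells n m) (hv : v (y, x) p = false) :
    pvU n m (pvSetV v y x p) p + 1 ≤ pvU n m v p :=
  pvU_set_lt n m v y x p hmem hv

lemma pv_mem_cells {n m ny nx : Int} (h1 : 0 ≤ ny) (h2 : ny < n) (h3 : 0 ≤ nx) (h4 : nx < m) :
    (ny, nx) ∈ pvCells n m := by
  simp only [pvCells, Finset.mem_image, Finset.mem_product, Finset.mem_range]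
  exact ⟨(ny.toNat, nx.toNat), ⟨by omega, by omega⟩, by simp; omega⟩

lemma pvQn_append (q : List (Int × Int × Bool × Int)) (e : Int × Int × Bool × Int) (p : Bool) :
    pvQn (q ++ [e]) p = pvQn q p + (if e.2.2.1 == p then 1 else 0) := by
  simp only [pvQn, List.filter_append, List.length_append, List.filter_cons,
    List.filter_nil]
  split <;> simp_all

-- termination bookkeeping for one pass over the direction list
lemma pvMeas_fold (maps : List String) (n m : Int) (y x : Int) (p : Bool) (k : Int)
    (ds : List (Int × Int)) :
    ∀ acc : List (Int × Int × Bool × Int) × (Int × Int → Bool → Bool),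
      6 * (5 * pvU n m (ds.foldl (pvAStep maps n m y x p k) acc).2 false
            + pvQn (ds.foldl (pvAStep maps n m y x p k) acc).1 false)
        + (pvU n m (ds.foldl (pvAStep maps n m y x p k) acc).2 true
            + pvQn (ds.foldl (pvAStep maps n m y x p k) acc).1 true)
      ≤ 6 * (5 * pvU n m acc.2 false + pvQn acc.1 false) + (pvU n m acc.2 true + pvQn acc.1 true)
          + (if p then 0 else ds.length) := by
  induction ds with
  | nil => intro acc; simp
  | cons d ds ih =>
    intro acc
    simp only [List.foldl_cons, List.length_cons]
    refine le_trans (ih _) ?_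
    have hbase : ∀ z : Nat,
        z ≤ 6 * (5 * pvU n m acc.2 false + pvQn acc.1 false) + (pvU n m acc.2 true + pvQn acc.1 true)
            + (if p then 0 else 1) →
        z + (if p then 0 else ds.length)
          ≤ 6 * (5 * pvU n m acc.2 false + pvQn acc.1 false) + (pvU n m acc.2 true + pvQn acc.1 true)
            + (if p then 0 else (ds.length + 1)) := by
      intro z hz; split_ifs at hz ⊢ with hp <;> omega
    apply hbase
    unfold pvAStep
    by_cases hg : 0 ≤ y + d.1 ∧ y + d.1 < n ∧ 0 ≤ x + d.2 ∧ x + d.2 < m ∧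
        pvCell maps (y + d.1) (x + d.2) ≠ 'X' ∧ acc.2 (y + d.1, x + d.2) p = false
    · simp only [if_pos hg]
      have hmem : (y + d.1, x + d.2) ∈ pvCells n m :=
        pv_mem_cells hg.1 hg.2.1 hg.2.2.1 hg.2.2.2.1
      have hvf := hg.2.2.2.2.2
      by_cases hp : p = true
      · subst hp
        have h1 := pvU_set_succ_le n m acc.2 (y + d.1) (x + d.2) true hmem hvf
        have h2 := pvU_set_le n m acc.2 (y + d.1) (x + d.2) true false
        simp only [pvQn_append, Bool.true_or]
        simp only [show ((true : Bool) == false) = false from rfl, Bool.false_eq_true,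
          if_false, show ((true : Bool) == true) = true from rfl, if_true]
        omega
      · have hpf : p = false := by revert hp; cases p <;> simp
        subst hpf
        by_cases hL : pvCell maps (y + d.1) (x + d.2) = 'L'
        · have h1 := pvU_set_le n m acc.2 (y + d.1) (x + d.2) true true
          have h2 := pvU_set_le n m acc.2 (y + d.1) (x + d.2) true false
          have hLb : (pvCell maps (y + d.1) (x + d.2) == 'L') = true := by simpa using hL
          simp only [pvQn_append, Bool.false_or, hLb]
          simp only [show ((true : Bool) == false) = false from rfl, Bool.false_eq_true,
            if_false, show ((true : Bool) == true) = true from rfl, if_true]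
          omega
        · have hLb : (pvCell maps (y + d.1) (x + d.2) == 'L') = false := by simpa using hL
          have h1 := pvU_set_succ_le n m acc.2 (y + d.1) (x + d.2) false hmem hvf
          have h2 := pvU_set_le n m acc.2 (y + d.1) (x + d.2) false true
          simp only [pvQn_append, Bool.false_or, hLb]
          simp only [show ((false : Bool) == false) = true from rfl, if_true,
            show ((false : Bool) == true) = false from rfl, Bool.false_eq_true, if_false]
          omega
    · simp only [if_neg hg]
      split_ifs <;> omega

lemma pvMeas_step (maps : List String) (n m : Int) (y x : Int) (p : Bool) (k : Int)
    (rest : List (Int × Int × Bool × Int)) (v : Int × Int → Bool → Bool) :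
    pvMeas n m (pvStepDirs maps n m y x p k (rest, v)).1 (pvStepDirs maps n m y x p k (rest, v)).2
      < pvMeas n m ((y, x, p, k) :: rest) v := by
  have h := pvMeas_fold maps n m y x p k pvDirs (rest, v)
  have hlen : pvDirs.length = 4 := rfl
  have hq : ∀ pb : Bool, pvQn ((y, x, p, k) :: rest) pb
      = pvQn rest pb + (if p == pb then 1 else 0) := by
    intro pb
    simp only [pvQn, List.filter_cons]
    split <;> simp_all
  simp only [pvStepDirs] at *
  cases p
  · simp only [hlen, Bool.false_eq_true, if_false] at h
    have h0 := hq false; have h1 := hq true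
    simp only [show ((false : Bool) == false) = true from rfl, if_true,
      show ((false : Bool) == true) = false from rfl, Bool.false_eq_true, if_false] at h0 h1
    unfold pvMeas
    omega
  · simp only [hlen, if_true] at h
    have h0 := hq false; have h1 := hq true
    simp only [show ((true : Bool) == false) = false from rfl, Bool.false_eq_true, if_false,
      show ((true : Bool) == true) = true from rfl, if_true] at h0 h1
    unfold pvMeas
    omega

def pvLoopA (maps : List String) (n m : Int) :
    List (Int × Int × Bool × Int) → (Int × Int → Bool → Bool) → Int
  | [], _ => -1
  | (y, x, p, k) :: rest, v =>
    if pvCell maps y x = 'E' ∧ p = true then k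
    else
      let s := pvStepDirs maps n m y x p k (rest, v)
      pvLoopA maps n m s.1 s.2
termination_by q v => pvMeas n m q v
decreasing_by
  exact pvMeas_step maps n m y x p k rest v

def solution (maps : List String) : Int :=
  let n : Int := maps.length
  let m : Int := (((PySem.List.pyGet? maps 0).getD "").toList.length : Int)
  let q0 : List (Int × Int × Bool × Int) :=
    (PySem.List.pyRange 0 n 1).flatMap (fun i =>
      ((PySem.List.pyRange 0 m 1).filter (fun j => pvCell maps i j == 'S')).map
        (fun j => (i, j, false, (0 : Int))))
  let v0 : Int × Int → Bool → Bool :=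
    q0.foldl (fun v e => pvSetV v e.1 e.2.1 false) (fun _ _ => false)
  pvLoopA maps n m q0 v0

-- ===== PORT B =====

def pvNbrs (y x : Int) : List (Int × Int) := [(y - 1, x), (y + 1, x), (y, x - 1), (y, x + 1)]

-- one neighbour test of B's bfs: the body of `for ny, nx in (...)`
def pvBStep (maps : List String) (n m : Int) (d' : Int)
    (acc : PySem.Dict (Int × Int) Int × List (Int × Int)) (cc : Int × Int) :
    PySem.Dict (Int × Int) Int × List (Int × Int) :=
  if 0 ≤ cc.1 ∧ cc.1 < n ∧ 0 ≤ cc.2 ∧ cc.2 < m ∧ pvCell maps cc.1 cc.2 ≠ 'X' ∧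
      acc.1.contains cc = false then
    (acc.1.insert cc d', acc.2 ++ [cc])
  else acc

def pvBRound (maps : List String) (n m : Int) (d' : Int)
    (frontier : List (Int × Int)) (dist : PySem.Dict (Int × Int) Int) :
    PySem.Dict (Int × Int) Int × List (Int × Int) :=
  frontier.foldl (fun acc c => (pvNbrs c.1 c.2).foldl (pvBStep maps n m d') acc) (dist, [])

def pvUD (n m : Int) (dist : PySem.Dict (Int × Int) Int) : Nat :=
  ((pvCells n m).filter (fun c => dist.contains c = false)).card

lemma pvUD_insert_lt (n m : Int) (dist : PySem.Dict (Int × Int) Int) (cc : Int × Int) (w : Int)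
    (hmem : cc ∈ pvCells n m) (hfresh : dist.contains cc = false) :
    pvUD n m (dist.insert cc w) < pvUD n m dist := by
  apply Finset.card_lt_card
  constructor
  · intro c hc
    simp only [Finset.mem_filter, PySem.Dict.contains_insert] at hc ⊢
    exact ⟨hc.1, (Bool.or_eq_false_iff.mp hc.2).2⟩
  · intro hsub
    have := hsub (Finset.mem_filter.mpr ⟨hmem, hfresh⟩)
    simp only [Finset.mem_filter, PySem.Dict.contains_insert] at this
    have := (Bool.or_eq_false_iff.mp this.2).1
    simp at this

lemma pvBStep_meas (maps : List String) (n m : Int) (d' : Int)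
    (acc : PySem.Dict (Int × Int) Int × List (Int × Int)) (cc : Int × Int) :
    pvUD n m (pvBStep maps n m d' acc cc).1 + (pvBStep maps n m d' acc cc).2.length
      ≤ pvUD n m acc.1 + acc.2.length := by
  unfold pvBStep
  by_cases hg : 0 ≤ cc.1 ∧ cc.1 < n ∧ 0 ≤ cc.2 ∧ cc.2 < m ∧ pvCell maps cc.1 cc.2 ≠ 'X' ∧
      acc.1.contains cc = false
  · simp only [if_pos hg, List.length_append, List.length_cons, List.length_nil]
    have hmem : cc ∈ pvCells n m := by
      have := pv_mem_cells hg.1 hg.2.1 hg.2.2.1 hg.2.2.2.1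
      simpa using this
    have := pvUD_insert_lt n m acc.1 cc d' hmem hg.2.2.2.2.2
    omega
  · simp [if_neg hg]

lemma pvBStep_fold_meas (maps : List String) (n m : Int) (d' : Int) (cs : List (Int × Int)) :
    ∀ acc : PySem.Dict (Int × Int) Int × List (Int × Int),
      pvUD n m (cs.foldl (pvBStep maps n m d') acc).1
          + (cs.foldl (pvBStep maps n m d') acc).2.length
        ≤ pvUD n m acc.1 + acc.2.length := by
  induction cs with
  | nil => intro acc; simp
  | cons c cs ih =>
    intro acc
    simp only [List.foldl_cons]
    exact le_trans (ih _) (pvBStep_meas maps n m d' acc c)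

lemma pvBRound_meas (maps : List String) (n m : Int) (d' : Int)
    (frontier : List (Int × Int)) (dist : PySem.Dict (Int × Int) Int) :
    pvUD n m (pvBRound maps n m d' frontier dist).1 + (pvBRound maps n m d' frontier dist).2.length
      ≤ pvUD n m dist := by
  unfold pvBRound
  have hgen : ∀ (fr : List (Int × Int)) (acc : PySem.Dict (Int × Int) Int × List (Int × Int)),
      pvUD n m (fr.foldl (fun acc c => (pvNbrs c.1 c.2).foldl (pvBStep maps n m d') acc) acc).1
          + (fr.foldl (fun acc c => (pvNbrs c.1 c.2).foldl (pvBStep maps n m d') acc) acc).2.length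
        ≤ pvUD n m acc.1 + acc.2.length := by
    intro fr
    induction fr with
    | nil => intro acc; simp
    | cons c fr ih =>
      intro acc
      simp only [List.foldl_cons]
      exact le_trans (ih _) (pvBStep_fold_meas maps n m d' (pvNbrs c.1 c.2) acc)
  simpa using hgen frontier (dist, [])

def pvBfsLoop (maps : List String) (n m : Int) :
    List (Int × Int) → PySem.Dict (Int × Int) Int → Int → PySem.Dict (Int × Int) Int
  | [], dist, _ => dist
  | c :: fr, dist, d =>
    let d' := d + 1
    let s := pvBRound maps n m d' (c :: fr) dist
    pvBfsLoop maps n m s.2 s.1 d'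
termination_by frontier dist _ => 2 * pvUD n m dist + (if frontier = [] then 0 else 1)
decreasing_by
  have h := pvBRound_meas maps n m (d + 1) (c :: fr) dist
  have hr : (2 * pvUD n m dist + if False then 0 else 1) = 2 * pvUD n m dist + 1 := by simp
  rw [hr]
  rcases hs : (pvBRound maps n m (d + 1) (c :: fr) dist).2 with _ | ⟨c2, fr2⟩
  · rw [hs] at h
    rw [if_pos rfl]
    simp only [List.length_nil] at h
    omega
  · rw [hs] at h
    rw [if_neg (by simp : ¬(c2 :: fr2 = []))]
    simp only [List.length_cons] at h
    omega

def solution_alt (maps : List String) : Int :=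
  let n : Int := maps.length
  let m : Int := (((PySem.List.pyGet? maps 0).getD "").toList.length : Int)
  let cellsOf : Char → List (Int × Int) := fun ch =>
    (PySem.List.pyRange 0 n 1).flatMap (fun i =>
      ((PySem.List.pyRange 0 m 1).filter (fun j => pvCell maps i j == ch)).map (fun j => (i, j)))
  let bfs : List (Int × Int) → PySem.Dict (Int × Int) Int := fun sources =>
    pvBfsLoop maps n m sources (PySem.Dict.ofList (sources.map (fun c => (c, (0 : Int))))) 0
  let dS := bfs (cellsOf 'S')
  let dE := bfs (cellsOf 'E')
  dS.items.foldl (fun best it =>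
    if pvCell maps it.1.1 it.1.2 = 'L' ∧ dE.contains it.1 = true then
      let t := it.2 + (dE.get? it.1).getD 0
      if best = -1 ∨ t < best then t else best
    else best) (-1)

-- ===== PRECONDITION & SPEC =====

-- Pre_ excludes exactly the inputs where Python A raises: the empty list (maps[0] IndexError) and
-- grids whose later rows are shorter than row 0 (string IndexError); nothing else is excluded.
def Pre_solution (maps : List String) : Prop :=
  maps ≠ [] ∧ ∀ s ∈ maps, ((maps.headD "").toList.length) ≤ s.toList.length
instance (maps : List String) : Decidable (Pre_solution maps) := by
  unfold Pre_solution; infer_instance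

def pvWitness_solution : List String := ["S.L", ".XE"]

def Spec_solution (maps : List String) (out : Int) : Prop := out = solution_alt maps
instance (maps : List String) (out : Int) : Decidable (Spec_solution maps out) := by
  unfold Spec_solution; infer_instance

-- ===== CLAIM (what is proved, stated in full; the proofs are below) =====
def Claim_equal_solution : Prop :=
  ∀ (maps : List String), Dom_solution maps → Pre_solution maps → Spec_solution maps (solution maps)


-- ===== LEMMAS AND PROOFS =====

-- ---------- graph layer ----------

-- passable cell: in bounds and not a wall
def pvPass (maps : List String) (n m : Int) (c : Int × Int) : Prop :=
  0 ≤ c.1 ∧ c.1 < n ∧ 0 ≤ c.2 ∧ c.2 < m ∧ pvCell maps c.1 c.2 ≠ 'X'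

-- one grid move between passable cells
def pvAdj (maps : List String) (n m : Int) (a b : Int × Int) : Prop :=
  pvPass maps n m a ∧ pvPass maps n m b ∧ (b.1 - a.1, b.2 - a.2) ∈ pvDirs

-- product-graph move: the lever flag is absorbed on entering a cell
def pvPAdj (maps : List String) (n m : Int) (s t : (Int × Int) × Bool) : Prop :=
  pvAdj maps n m s.1 t.1 ∧ t.2 = (s.2 || (pvCell maps t.1.1 t.1.2 == 'L'))

def pvSrc (maps : List String) (n m : Int) (ch : Char) (c : Int × Int) : Prop :=
  0 ≤ c.1 ∧ c.1 < n ∧ 0 ≤ c.2 ∧ c.2 < m ∧ pvCell maps c.1 c.2 = ch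

-- endpoint of a walk given as head + steps
def pvEndOf (s : (Int × Int) × Bool) (rest : List ((Int × Int) × Bool)) : (Int × Int) × Bool :=
  (s :: rest).getLast (by simp)

def pvEndOfP (s : Int × Int) (rest : List (Int × Int)) : Int × Int :=
  (s :: rest).getLast (by simp)

-- a product walk from a fresh start at an S cell to a lever-passed E cell, measured in steps
def pvAnsSet (maps : List String) (n m : Int) : Set ℕ :=
  { l | ∃ s rest, List.IsChain (pvPAdj maps n m) (s :: rest) ∧
      pvSrc maps n m 'S' s.1 ∧ s.2 = false ∧
      pvCell maps (pvEndOf s rest).1.1 (pvEndOf s rest).1.2 = 'E' ∧ (pvEndOf s rest).2 = true ∧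
      rest.length = l }

-- plain walks between cell sets
def pvDSet (maps : List String) (n m : Int) (ch : Char) (c : Int × Int) : Set ℕ :=
  { l | ∃ s rest, List.IsChain (pvAdj maps n m) (s :: rest) ∧ pvSrc maps n m ch s ∧
      pvPass maps n m s ∧ pvEndOfP s rest = c ∧ rest.length = l }

-- the two-BFS candidate set: per-lever sum of the two shortest distances
def pvT (maps : List String) (n m : Int) : Set ℕ :=
  { t | ∃ c : Int × Int, pvSrc maps n m 'L' c ∧
      (pvDSet maps n m 'S' c).Nonempty ∧ (pvDSet maps n m 'E' c).Nonempty ∧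
      t = sInf (pvDSet maps n m 'S' c) + sInf (pvDSet maps n m 'E' c) }

-- ---------- the value computed by A's loop, as a function of its state ----------

def pvPst (e : Int × Int × Bool × Int) : (Int × Int) × Bool := ((e.1, e.2.1), e.2.2.1)

def pvM (maps : List String) (n m : Int) (q : List (Int × Int × Bool × Int))
    (v : Int × Int → Bool → Bool) : Set ℕ :=
  { t | ∃ e ∈ q, ∃ rest, List.IsChain (pvPAdj maps n m) (pvPst e :: rest) ∧
      pvCell maps (pvEndOf (pvPst e) rest).1.1 (pvEndOf (pvPst e) rest).1.2 = 'E' ∧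
      (pvEndOf (pvPst e) rest).2 = true ∧
      (∀ u ∈ rest, v u.1 u.2 = false) ∧
      t = e.2.2.2.toNat + rest.length }

noncomputable def pvOptMin (M : Set ℕ) : Int := by
  classical exact if M.Nonempty then ((sInf M : ℕ) : Int) else -1

noncomputable def pvAns (maps : List String) (n m : Int) (q : List (Int × Int × Bool × Int))
    (v : Int × Int → Bool → Bool) : Int :=
  pvOptMin (pvM maps n m q v)

lemma pvOptMin_congr (M M' : Set ℕ) (hne : M.Nonempty ↔ M'.Nonempty) (hinf : sInf M = sInf M') :
    pvOptMin M = pvOptMin M' := by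
  classical
  unfold pvOptMin
  by_cases h : M.Nonempty
  · rw [if_pos h, if_pos (hne.mp h), hinf]
  · rw [if_neg h, if_neg (fun hh => h (hne.mpr hh))]

-- ---------- A's loop invariant ----------

def pvInv (maps : List String) (n m : Int) (q : List (Int × Int × Bool × Int))
    (v : Int × Int → Bool → Bool) : Prop :=
  (∃ (d a b : ℕ), q.map (fun e => e.2.2.2) =
      List.replicate a ((d : ℤ)) ++ List.replicate b ((d : ℤ) + 1)) ∧
  (∀ e ∈ q, pvPass maps n m (e.1, e.2.1)) ∧
  (∀ e ∈ q, v (e.1, e.2.1) e.2.2.1 = true) ∧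
  (∀ s : (Int × Int) × Bool, v s.1 s.2 = true → (∀ e ∈ q, pvPst e ≠ s) →
      ∀ t, pvPAdj maps n m s t → v t.1 t.2 = true) ∧
  (∀ c : Int × Int, pvCell maps c.1 c.2 = 'L' → v c false = false)

-- ---------- generic small lemmas ----------

lemma pv_minset_eq (M M' : Set ℕ)
    (h1 : ∀ x ∈ M, ∃ y ∈ M', y ≤ x) (h2 : ∀ y ∈ M', ∃ x ∈ M, x ≤ y) :
    (M.Nonempty ↔ M'.Nonempty) ∧ sInf M = sInf M' := by
  have hne : M.Nonempty ↔ M'.Nonempty := by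
    constructor
    · rintro ⟨x, hx⟩; rcases h1 x hx with ⟨y, hy, -⟩; exact ⟨y, hy⟩
    · rintro ⟨y, hy⟩; rcases h2 y hy with ⟨x, hx, -⟩; exact ⟨x, hx⟩
  refine ⟨hne, ?_⟩
  by_cases h : M.Nonempty
  · have h' := hne.mp h
    apply le_antisymm
    · rcases h2 _ (Nat.sInf_mem h') with ⟨x, hx, hle⟩
      exact le_trans (Nat.sInf_le hx) hle
    · rcases h1 _ (Nat.sInf_mem h) with ⟨y, hy, hle⟩
      exact le_trans (Nat.sInf_le hy) hle
  · have h' : ¬ M'.Nonempty := fun hh => h (hne.mpr hh)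
    rw [Set.not_nonempty_iff_eq_empty] at h h'
    rw [h, h']

lemma pv_exists_last_split {α : Type} (p : α → Prop) [DecidablePred p] (l : List α)
    (h : ∃ x ∈ l, p x) :
    ∃ l1 u l2, l = l1 ++ u :: l2 ∧ p u ∧ ∀ x ∈ l2, ¬ p x := by
  induction l using List.reverseRecOn with
  | nil => simp at h
  | append_singleton l a ih =>
    by_cases ha : p a
    · exact ⟨l, a, [], by simp, ha, by simp⟩
    · have : ∃ x ∈ l, p x := by
        rcases h with ⟨x, hx, hpx⟩
        rcases (List.mem_append.mp hx) with h' | h'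
        · exact ⟨x, h', hpx⟩
        · simp at h'; subst h'; exact absurd hpx ha
      rcases ih this with ⟨l1, u, l2, heq, hu, hl2⟩
      refine ⟨l1, u, l2 ++ [a], by simp [heq], hu, ?_⟩
      intro x hx
      rcases List.mem_append.mp hx with h' | h'
      · exact hl2 x h'
      · simp at h'; subst h'; exact ha

lemma pvAdj_symm (maps : List String) (n m : Int) (a b : Int × Int)
    (h : pvAdj maps n m a b) : pvAdj maps n m b a := by
  obtain ⟨h1, h2, h3⟩ := h
  refine ⟨h2, h1, ?_⟩
  simp only [pvDirs, List.mem_cons, List.not_mem_nil, or_false, Prod.ext_iff] at h3 ⊢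
  omega

-- ---------- characterization of pvStepDirs ----------

lemma pvSetV_true_iff (v : Int × Int → Bool → Bool) (y x : Int) (p : Bool) (c : Int × Int)
    (q : Bool) : pvSetV v y x p c q = true ↔ ((c = (y, x) ∧ q = p) ∨ v c q = true) := by
  unfold pvSetV
  by_cases h : c = (y, x) ∧ q = p
  · simp [h]
  · simp [h]

lemma pvStepDirs_aux (maps : List String) (n m : Int) (y x : Int) (p : Bool) (k : Int)
    (hpass : pvPass maps n m (y, x)) :
    ∀ ds : List (Int × Int), (∀ d ∈ ds, d ∈ pvDirs) →
    ∀ (r0 : List (Int × Int × Bool × Int)) (w : Int × Int → Bool → Bool),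
      (∀ c : Int × Int, pvCell maps c.1 c.2 = 'L' → w c false = false) →
    ∃ news,
      (ds.foldl (pvAStep maps n m y x p k) (r0, w)).1 = r0 ++ news ∧
      (∀ e ∈ news, e.2.2.2 = k + 1 ∧ pvPAdj maps n m ((y, x), p) (pvPst e)) ∧
      (∀ c q, (ds.foldl (pvAStep maps n m y x p k) (r0, w)).2 c q = true ↔
        (w c q = true ∨ ∃ e ∈ news, pvPst e = (c, q))) ∧
      (∀ d ∈ ds, ∀ t : (Int × Int) × Bool, pvPAdj maps n m ((y, x), p) t →
        t.1 = (y + d.1, x + d.2) → (ds.foldl (pvAStep maps n m y x p k) (r0, w)).2 t.1 t.2 = true) ∧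
      (∀ e ∈ news, w (pvPst e).1 (pvPst e).2 = false ∨
        ((pvPst e).2 = true ∧ p = false ∧ pvCell maps (pvPst e).1.1 (pvPst e).1.2 = 'L')) ∧
      (∀ e ∈ news, ¬ ((pvPst e).2 = false ∧ pvCell maps (pvPst e).1.1 (pvPst e).1.2 = 'L')) ∧
      (∀ c : Int × Int, pvCell maps c.1 c.2 = 'L' →
        (ds.foldl (pvAStep maps n m y x p k) (r0, w)).2 c false = false) := by
  intro ds
  induction ds with
  | nil =>
    intro _ r0 w hLfree
    refine ⟨[], by simp, by simp, by simp, by simp, by simp, by simp, by simpa using hLfree⟩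
  | cons d ds ih =>
    intro hds r0 w hLfree
    have hd : d ∈ pvDirs := hds d (List.mem_cons_self ..)
    have hds' : ∀ d' ∈ ds, d' ∈ pvDirs := fun d' h' => hds d' (List.mem_cons_of_mem _ h')
    simp only [List.foldl_cons]
    by_cases hg : 0 ≤ y + d.1 ∧ y + d.1 < n ∧ 0 ≤ x + d.2 ∧ x + d.2 < m ∧
        pvCell maps (y + d.1) (x + d.2) ≠ 'X' ∧ w (y + d.1, x + d.2) p = false
    · -- the guard passes: one new entry is appended and marked
      have hstep : pvAStep maps n m y x p k (r0, w) d =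
          (r0 ++ [(y + d.1, x + d.2, p || (pvCell maps (y + d.1) (x + d.2) == 'L'), k + 1)],
           pvSetV w (y + d.1) (x + d.2) (p || (pvCell maps (y + d.1) (x + d.2) == 'L'))) := by
        unfold pvAStep
        simp only [if_pos hg]
      set p' := p || (pvCell maps (y + d.1) (x + d.2) == 'L') with hp'
      set e1 : Int × Int × Bool × Int := (y + d.1, x + d.2, p', k + 1) with he1
      set w1 := pvSetV w (y + d.1) (x + d.2) p' with hw1
      have hLfree1 : ∀ c : Int × Int, pvCell maps c.1 c.2 = 'L' → w1 c false = false := by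
        intro c hc
        rw [hw1]
        unfold pvSetV
        by_cases hcc : c = (y + d.1, x + d.2) ∧ false = p'
        · exfalso
          rcases hcc with ⟨hc1, hc2⟩
          rw [hc1] at hc
          simp only [hp'] at hc2
          rw [hc] at hc2
          simp at hc2
        · rw [if_neg hcc]; exact hLfree c hc
      rcases ih hds' (r0 ++ [e1]) w1 hLfree1 with
        ⟨news, hq, hpadj, hpt, hsucc, hfresh, hnoLf, hLf⟩
      have hpass' : pvPass maps n m (y + d.1, x + d.2) :=
        ⟨hg.1, hg.2.1, hg.2.2.1, hg.2.2.2.1, hg.2.2.2.2.1⟩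
      have hadj1 : pvAdj maps n m (y, x) (y + d.1, x + d.2) := by
        refine ⟨hpass, hpass', ?_⟩
        simpa using hd
      have hpadj1 : pvPAdj maps n m ((y, x), p) (pvPst e1) := by
        refine ⟨hadj1, ?_⟩
        simp [pvPst, he1, hp']
      refine ⟨e1 :: news, ?_, ?_, ?_, ?_, ?_, ?_, ?_⟩
      · rw [hstep, hq]; simp
      · intro e he
        rcases List.mem_cons.mp he with he | he
        · subst he; exact ⟨rfl, hpadj1⟩
        · exact hpadj e he
      · intro c q
        rw [hstep]
        rw [hpt c q]
        rw [hw1, pvSetV_true_iff]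
        constructor
        · rintro (h | h)
          · rcases h with (⟨h1, h2⟩ | h1)
            · exact Or.inr ⟨e1, List.mem_cons_self .., by simp [pvPst, he1, h1, h2]⟩
            · exact Or.inl h1
          · rcases h with ⟨e, he, hh⟩
            exact Or.inr ⟨e, List.mem_cons_of_mem _ he, hh⟩
        · rintro (h | h)
          · exact Or.inl (Or.inr h)
          · rcases h with ⟨e, he, hh⟩
            rcases List.mem_cons.mp he with he | he
            · subst he
              refine Or.inl (Or.inl ?_)
              simp [pvPst, he1] at hh
              exact ⟨hh.1.symm ▸ rfl, hh.2.symm ▸ rfl⟩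
            · exact Or.inr ⟨e, he, hh⟩
      · rw [hstep]
        intro d' hd' t hpt' ht1
        rcases List.mem_cons.mp hd' with hdd | hdd
        · -- the direction handled in this step: t is exactly the appended state
          subst hdd
          have ht : t = pvPst e1 := by
            have ht2 := hpt'.2
            rw [ht1] at ht2
            apply Prod.ext
            · rw [ht1]; simp [pvPst, he1]
            · rw [ht2]; simp [pvPst, he1, hp']
          have hmark : w1 (pvPst e1).1 (pvPst e1).2 = true := by
            rw [hw1, pvSetV_true_iff]
            exact Or.inl ⟨by simp [pvPst, he1], by simp [pvPst, he1]⟩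
          have hmono : ∀ c q, w1 c q = true →
              (ds.foldl (pvAStep maps n m y x p k) (r0 ++ [e1], w1)).2 c q = true := by
            intro c q hcq
            rw [hpt c q]; exact Or.inl hcq
          rw [ht]
          exact hmono _ _ hmark
        · exact hsucc d' hdd t hpt' ht1
      · intro e he
        rcases List.mem_cons.mp he with he | he
        · subst he
          by_cases hLc : pvCell maps (y + d.1) (x + d.2) = 'L'
          · cases hp : p
            · right
              refine ⟨?_, rfl, by simpa [pvPst, he1] using hLc⟩
              simp [pvPst, he1, hp', hLc, hp]
            · left
              have : p' = p := by simp [hp', hp, hLc]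
              simp only [pvPst, he1, this]
              have := hg.2.2.2.2.2
              simpa using this
          · left
            have : p' = p := by
              simp only [hp']
              have : (pvCell maps (y + d.1) (x + d.2) == 'L') = false := by simpa using hLc
              simp [this]
            simp only [pvPst, he1, this]
            have := hg.2.2.2.2.2
            simpa using this
        · -- entries added later: fresh w.r.t. w1, hence w.r.t. w (or the quirk case)
          rcases hfresh e he with hf | hf
          · by_cases hw : w (pvPst e).1 (pvPst e).2 = false
            · exact Or.inl hw
            · exfalso
              have hwt : w (pvPst e).1 (pvPst e).2 = true := by
                revert hw; cases h : w (pvPst e).1 (pvPst e).2 <;> simp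
              have : w1 (pvPst e).1 (pvPst e).2 = true := by
                rw [hw1, pvSetV_true_iff]; exact Or.inr hwt
              rw [this] at hf; exact absurd hf (by simp)
          · exact Or.inr hf
      · intro e he
        rcases List.mem_cons.mp he with he | he
        · subst he
          rintro ⟨hst, hLc⟩
          simp only [pvPst, he1] at hst hLc
          rw [hp'] at hst
          have : (pvCell maps (y + d.1) (x + d.2) == 'L') = true := by simpa using hLc
          rw [this] at hst
          simp at hst
        · exact hnoLf e he
      · rw [hstep]; exact hLf
    · -- guard fails: nothing changes in this step
      have hstep : pvAStep maps n m y x p k (r0, w) d = (r0, w) := by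
        unfold pvAStep
        simp only [if_neg hg]
      rw [hstep]
      rcases ih hds' r0 w hLfree with ⟨news, hq, hpadj, hpt, hsucc, hfresh, hnoLf, hLf⟩
      refine ⟨news, hq, hpadj, hpt, ?_, hfresh, hnoLf, hLf⟩
      intro d' hd' t hpt' ht1
      rcases List.mem_cons.mp hd' with hdd | hdd
      · rw [hdd] at ht1
        -- the guard failed although the move is a real product edge: the target was already
        -- marked (using no-(L,false) for the lever quirk)
        have hpassT : pvPass maps n m t.1 := hpt'.1.2.1
        have hx : pvCell maps (y + d.1) (x + d.2) ≠ 'X' := by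
          have := hpassT.2.2.2.2; rwa [ht1] at this
        have hb : 0 ≤ y + d.1 ∧ y + d.1 < n ∧ 0 ≤ x + d.2 ∧ x + d.2 < m := by
          have h1 := hpassT.1; have h2 := hpassT.2.1
          have h3 := hpassT.2.2.1; have h4 := hpassT.2.2.2.1
          rw [ht1] at h1 h2 h3 h4
          exact ⟨h1, h2, h3, h4⟩
        have hw : w (y + d.1, x + d.2) p = true := by
          by_cases hwp : w (y + d.1, x + d.2) p = false
          · exact absurd ⟨hb.1, hb.2.1, hb.2.2.1, hb.2.2.2, hx, hwp⟩ hg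
          · revert hwp; cases h : w (y + d.1, x + d.2) p <;> simp
        -- t.2 = p ∨ target is a lever; in the lever case with p = false, hLfree contradicts hw
        have ht2 : t.2 = (p || (pvCell maps (y + d.1) (x + d.2) == 'L')) := by
          have := hpt'.2
          rwa [ht1] at this
        by_cases hLc : pvCell maps (y + d.1) (x + d.2) = 'L'
        · by_cases hp : p = true
          · have hT : t.2 = true := by rw [ht2, hp]; simp
            have hmarked : w t.1 t.2 = true := by
              rw [hp] at hw
              rw [ht1, hT]
              exact hw
            rw [hpt t.1 t.2]; exact Or.inl hmarked
          · exfalso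
            have hp0 : p = false := by revert hp; cases p <;> simp
            rw [hp0] at hw
            have := hLfree (y + d.1, x + d.2) (by simpa using hLc)
            rw [this] at hw
            simp at hw
        · have : t.2 = p := by
            rw [ht2]
            have : (pvCell maps (y + d.1) (x + d.2) == 'L') = false := by simpa using hLc
            simp [this]
          have hmarked : w t.1 t.2 = true := by rw [ht1, this]; exact hw
          rw [hpt t.1 t.2]; exact Or.inl hmarked
      · exact hsucc d' hdd t hpt' ht1

lemma pvStepDirs_char (maps : List String) (n m : Int) (y x : Int) (p : Bool) (k : Int)
    (rest : List (Int × Int × Bool × Int)) (v : Int × Int → Bool → Bool)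
    (hpass : pvPass maps n m (y, x))
    (hLfree : ∀ c : Int × Int, pvCell maps c.1 c.2 = 'L' → v c false = false) :
    ∃ news, (pvStepDirs maps n m y x p k (rest, v)).1 = rest ++ news ∧
      (∀ e ∈ news, e.2.2.2 = k + 1 ∧ pvPAdj maps n m ((y, x), p) (pvPst e)) ∧
      (∀ c q, (pvStepDirs maps n m y x p k (rest, v)).2 c q = true ↔
        (v c q = true ∨ ∃ e ∈ news, pvPst e = (c, q))) ∧
      (∀ t, pvPAdj maps n m ((y, x), p) t →
        (pvStepDirs maps n m y x p k (rest, v)).2 t.1 t.2 = true) ∧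
      (∀ e ∈ news, v (pvPst e).1 (pvPst e).2 = false ∨
        ((pvPst e).2 = true ∧ p = false ∧ pvCell maps (pvPst e).1.1 (pvPst e).1.2 = 'L')) ∧
      (∀ e ∈ news, ¬ ((pvPst e).2 = false ∧ pvCell maps (pvPst e).1.1 (pvPst e).1.2 = 'L')) := by
  rcases pvStepDirs_aux maps n m y x p k hpass pvDirs (fun _ h => h) rest v hLfree with
    ⟨news, hq, hpadj, hpt, hsucc, hfresh, hnoLf, -⟩
  refine ⟨news, hq, hpadj, hpt, ?_, hfresh, hnoLf⟩
  intro t hpt'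
  have hmem : (t.1.1 - y, t.1.2 - x) ∈ pvDirs := hpt'.1.2.2
  have ht1 : t.1 = (y + (t.1.1 - y, t.1.2 - x).1, x + (t.1.1 - y, t.1.2 - x).2) := by
    simp
  exact hsucc _ hmem t hpt' ht1

-- ---------- the two main steps of A's loop ----------

lemma pvShape_mem {q : List (Int × Int × Bool × Int)} {d a b : ℕ}
    (h : q.map (fun e => e.2.2.2) = List.replicate a ((d : ℤ)) ++ List.replicate b ((d : ℤ) + 1))
    {e : Int × Int × Bool × Int} (he : e ∈ q) : e.2.2.2 = (d : ℤ) ∨ e.2.2.2 = (d : ℤ) + 1 := by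
  have : e.2.2.2 ∈ q.map (fun e => e.2.2.2) := List.mem_map_of_mem he
  rw [h] at this
  rcases List.mem_append.mp this with h' | h'
  · exact Or.inl (List.eq_of_mem_replicate h')
  · exact Or.inr (List.eq_of_mem_replicate h')

lemma pvShape_head_le {y x : Int} {p : Bool} {k : Int} {rest : List (Int × Int × Bool × Int)}
    {d a b : ℕ}
    (h : ((y, x, p, k) :: rest).map (fun e => e.2.2.2) =
      List.replicate a ((d : ℤ)) ++ List.replicate b ((d : ℤ) + 1)) :
    0 ≤ k ∧ ∀ e ∈ (y, x, p, k) :: rest, k ≤ e.2.2.2 ∧ e.2.2.2 ≤ k + 1 := by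
  have hk := pvShape_mem h (List.mem_cons_self ..)
  simp only at hk
  rcases Nat.eq_zero_or_pos a with ha | ha
  · -- all entries are d+1
    subst ha
    have hall : ∀ e ∈ (y, x, p, k) :: rest, e.2.2.2 = (d : ℤ) + 1 := by
      intro e he
      have : e.2.2.2 ∈ ((y, x, p, k) :: rest).map (fun e => e.2.2.2) := List.mem_map_of_mem he
      rw [h] at this
      simp only [List.replicate_zero, List.nil_append] at this
      exact List.eq_of_mem_replicate this
    have hkk := hall _ (List.mem_cons_self ..)
    simp only at hkk
    constructor
    · rw [hkk]; positivity
    · intro e he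
      rw [hall e he, hkk]
      omega
  · -- the head is d
    have hhead : k = (d : ℤ) := by
      have : ((y, x, p, k) :: rest).map (fun e => e.2.2.2) =
          k :: rest.map (fun e => e.2.2.2) := by simp
      rw [this] at h
      rcases a with _ | a'
      · omega
      · simp only [List.replicate_succ, List.cons_append, List.cons.injEq] at h
        exact h.1
    constructor
    · rw [hhead]; positivity
    · intro e he
      rcases pvShape_mem h he with h' | h' <;> rw [h', hhead] <;> omega

lemma pvAns_mem_lb (maps : List String) (n m : Int) (y x : Int) (p : Bool) (k : Int)
    (rest : List (Int × Int × Bool × Int))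
    (v : Int × Int → Bool → Bool)
    (hinv : pvInv maps n m ((y, x, p, k) :: rest) v) :
    ∀ t ∈ pvM maps n m ((y, x, p, k) :: rest) v, k.toNat ≤ t := by
  rcases hinv.1 with ⟨d, a, b, hsh⟩
  rcases pvShape_head_le hsh with ⟨hk0, hle⟩
  rintro t ⟨e, he, wrest, -, -, -, -, ht⟩
  have := (hle e he).1
  omega

lemma pvAns_return (maps : List String) (n m : Int) (y x : Int) (p : Bool) (k : Int)
    (rest : List (Int × Int × Bool × Int)) (v : Int × Int → Bool → Bool)
    (hinv : pvInv maps n m ((y, x, p, k) :: rest) v)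
    (hE : pvCell maps y x = 'E' ∧ p = true) :
    pvAns maps n m ((y, x, p, k) :: rest) v = k := by
  classical
  have hk0 : 0 ≤ k := by
    rcases hinv.1 with ⟨d, a, b, hsh⟩
    exact (pvShape_head_le hsh).1
  have hmem : k.toNat ∈ pvM maps n m ((y, x, p, k) :: rest) v := by
    refine ⟨(y, x, p, k), List.mem_cons_self .., [], List.isChain_singleton _, ?_, ?_, by simp,
      by simp⟩
    · simpa [pvEndOf, pvPst] using hE.1
    · simpa [pvEndOf, pvPst] using hE.2
  have hlb := pvAns_mem_lb maps n m y x p k rest v hinv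
  have hinf : sInf (pvM maps n m ((y, x, p, k) :: rest) v) = k.toNat :=
    le_antisymm (Nat.sInf_le hmem) (le_csInf ⟨_, hmem⟩ hlb)
  unfold pvAns pvOptMin
  rw [if_pos ⟨_, hmem⟩, hinf]
  omega


lemma pvEndOf_cons (s c : (Int × Int) × Bool) (w : List ((Int × Int) × Bool)) :
    pvEndOf s (c :: w) = pvEndOf c w := by
  simp [pvEndOf, List.getLast_cons]

lemma pvEndOf_append (l1 : List ((Int × Int) × Bool)) :
    ∀ (s u : (Int × Int) × Bool) (l2 : List ((Int × Int) × Bool)),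
      pvEndOf s (l1 ++ u :: l2) = pvEndOf u l2 := by
  induction l1 with
  | nil => intro s u l2; simpa using pvEndOf_cons s u l2
  | cons c l1 ih =>
    intro s u l2
    rw [List.cons_append, pvEndOf_cons]
    exact ih c u l2

lemma pvShape_next {y x : Int} {p : Bool} {k : Int} {rest news : List (Int × Int × Bool × Int)}
    {d a b : ℕ}
    (hsh : ((y, x, p, k) :: rest).map (fun e => e.2.2.2) =
      List.replicate a ((d : ℤ)) ++ List.replicate b ((d : ℤ) + 1))
    (hnews : ∀ e ∈ news, e.2.2.2 = k + 1) :
    ∃ (d' a' b' : ℕ), (rest ++ news).map (fun e => e.2.2.2) =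
      List.replicate a' ((d' : ℤ)) ++ List.replicate b' ((d' : ℤ) + 1) := by
  have hmap : (rest ++ news).map (fun e => e.2.2.2) =
      rest.map (fun e => e.2.2.2) ++ news.map (fun e => e.2.2.2) := List.map_append ..
  have hnmap : news.map (fun e => e.2.2.2) = List.replicate news.length (k + 1) := by
    have : ∀ z ∈ news.map (fun e => e.2.2.2), z = k + 1 := by
      intro z hz
      rcases List.mem_map.mp hz with ⟨e, he, hze⟩
      rw [← hze]; exact hnews e he
    rw [List.eq_replicate_of_mem this, List.length_map]
  have hcons : ((y, x, p, k) :: rest).map (fun e => e.2.2.2) =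
      k :: rest.map (fun e => e.2.2.2) := by simp
  rcases Nat.eq_zero_or_pos a with ha | ha
  · subst ha
    rcases b with _ | b'
    · exfalso
      simp at hsh
    · rw [hcons] at hsh
      simp only [List.replicate_zero, List.nil_append, List.replicate_succ,
        List.cons.injEq] at hsh
      refine ⟨d + 1, b', news.length, ?_⟩
      rw [hmap, hsh.2, hnmap, hsh.1]
      push_cast
      ring_nf
  · rcases a with _ | a'
    · omega
    · rw [hcons] at hsh
      simp only [List.replicate_succ, List.cons_append, List.cons.injEq] at hsh
      refine ⟨d, a', b + news.length, ?_⟩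
      rw [hmap, hsh.2, hnmap, ← hsh.1]
      rw [List.replicate_add, List.append_assoc, hsh.1]

lemma pvStep_preserve (maps : List String) (n m : Int) (y x : Int) (p : Bool) (k : Int)
    (rest : List (Int × Int × Bool × Int)) (v : Int × Int → Bool → Bool)
    (hinv : pvInv maps n m ((y, x, p, k) :: rest) v)
    (hnE : ¬ (pvCell maps y x = 'E' ∧ p = true)) :
    pvInv maps n m (pvStepDirs maps n m y x p k (rest, v)).1
        (pvStepDirs maps n m y x p k (rest, v)).2 ∧
    pvAns maps n m (pvStepDirs maps n m y x p k (rest, v)).1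
        (pvStepDirs maps n m y x p k (rest, v)).2
      = pvAns maps n m ((y, x, p, k) :: rest) v := by
  classical
  obtain ⟨⟨d, a, b, hsh⟩, hpassq, hmarkq, hclosed, hLfree⟩ := hinv
  have hpassH : pvPass maps n m (y, x) := hpassq _ (List.mem_cons_self ..)
  have hk0 : 0 ≤ k := (pvShape_head_le hsh).1
  have hle := (pvShape_head_le hsh).2
  rcases pvStepDirs_char maps n m y x p k rest v hpassH hLfree with
    ⟨news, hq, hpadjn, hpt, hsucc, hfresh, hnoLf⟩
  have hmono : ∀ (c : Int × Int) (qq : Bool), v c qq = true → (pvStepDirs maps n m y x p k (rest, v)).2 c qq = true :=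
    fun c qq h => (hpt c qq).mpr (Or.inl h)
  have hptF : ∀ u : (Int × Int) × Bool, (pvStepDirs maps n m y x p k (rest, v)).2 u.1 u.2 = false →
      v u.1 u.2 = false ∧ ∀ e ∈ news, pvPst e ≠ u := by
    intro u hu
    have hnt : ¬ ((pvStepDirs maps n m y x p k (rest, v)).2 u.1 u.2 = true) := by rw [hu]; simp
    rw [hpt] at hnt
    push Not at hnt
    refine ⟨?_, fun e he hh => hnt.2 e he (by rw [hh])⟩
    have := hnt.1
    revert this; cases v u.1 u.2 <;> simp
  have hinvNew : pvInv maps n m (pvStepDirs maps n m y x p k (rest, v)).1 (pvStepDirs maps n m y x p k (rest, v)).2 := by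
    refine ⟨?_, ?_, ?_, ?_, ?_⟩
    · rw [hq]
      exact pvShape_next hsh (fun e he => (hpadjn e he).1)
    · intro e he
      rw [hq] at he
      rcases List.mem_append.mp he with he | he
      · exact hpassq e (List.mem_cons_of_mem _ he)
      · exact ((hpadjn e he).2).1.2.1
    · intro e he
      rw [hq] at he
      rcases List.mem_append.mp he with he | he
      · exact hmono _ _ (hmarkq e (List.mem_cons_of_mem _ he))
      · exact (hpt _ _).mpr (Or.inr ⟨e, he, rfl⟩)
    · intro st hst hnq t hadj
      rcases (hpt _ _).mp hst with hold | hnew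
      · by_cases hhead : st = ((y, x), p)
        · subst hhead
          exact hsucc t hadj
        · have hnotin : ∀ e ∈ (y, x, p, k) :: rest, pvPst e ≠ st := by
            intro e he
            rcases List.mem_cons.mp he with he | he
            · subst he; simpa [pvPst] using fun hh => hhead hh.symm
            · exact hnq e (by rw [hq]; exact List.mem_append.mpr (Or.inl he))
          exact hmono _ _ (hclosed st hold hnotin t hadj)
      · exfalso
        rcases hnew with ⟨e, he, hpe⟩
        exact hnq e (by rw [hq]; exact List.mem_append.mpr (Or.inr he)) hpe
    · intro c hc
      have hnt : ¬ ((pvStepDirs maps n m y x p k (rest, v)).2 c false = true) := by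
        rw [hpt]
        push Not
        refine ⟨by rw [hLfree c hc]; simp, ?_⟩
        intro e he hh
        exact absurd ⟨by rw [hh], by rw [hh]; exact hc⟩ (hnoLf e he)
      revert hnt; cases (pvStepDirs maps n m y x p k (rest, v)).2 c false <;> simp
  refine ⟨hinvNew, ?_⟩
  unfold pvAns
  have hON : ∀ t ∈ pvM maps n m ((y, x, p, k) :: rest) v,
      ∃ t' ∈ pvM maps n m (pvStepDirs maps n m y x p k (rest, v)).1
        (pvStepDirs maps n m y x p k (rest, v)).2, t' ≤ t := by
    -- every total of the old state is matched by one at most as large in the new state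
    rintro t ⟨e, he, w0, hch, hcE, hsT, hav, ht⟩
    by_cases hall : ∀ u ∈ w0, (pvStepDirs maps n m y x p k (rest, v)).2 u.1 u.2 = false
    · rcases List.mem_cons.mp he with hehead | herest
      · -- the popped head: its first walk node would have to be marked
        exfalso
        subst hehead
        rcases w0 with _ | ⟨u1, w1⟩
        · exact hnE ⟨by simpa [pvEndOf, pvPst] using hcE, by simpa [pvEndOf, pvPst] using hsT⟩
        · have hadj1 : pvPAdj maps n m (pvPst (y, x, p, k)) u1 :=
            (List.isChain_cons_cons.mp hch).1
          have := hsucc u1 (by simpa [pvPst] using hadj1)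
          rw [hall u1 (List.mem_cons_self ..)] at this
          simp at this
      · exact ⟨t, ⟨e, by rw [hq]; exact List.mem_append.mpr (Or.inl herest),
          w0, hch, hcE, hsT, hall, ht⟩, le_refl t⟩
    · -- the walk crosses the freshly marked states: restart at the last crossing
      push Not at hall
      have hex : ∃ u ∈ w0, (pvStepDirs maps n m y x p k (rest, v)).2 u.1 u.2 = true := by
        rcases hall with ⟨u, hu, hvu⟩
        exact ⟨u, hu, by revert hvu; cases (pvStepDirs maps n m y x p k (rest, v)).2 u.1 u.2 <;> simp⟩
      rcases pv_exists_last_split (fun u => (pvStepDirs maps n m y x p k (rest, v)).2 u.1 u.2 = true) w0 hex with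
        ⟨l1, u, l2, hsplit, hu, hl2⟩
      have hufresh : v u.1 u.2 = false := by
        apply hav
        rw [hsplit]
        simp
      rcases (hpt u.1 u.2).mp hu with hvold | ⟨e'', he'', hpe''⟩
      · rw [hufresh] at hvold; simp at hvold
      · have hl2av : ∀ u' ∈ l2, (pvStepDirs maps n m y x p k (rest, v)).2 u'.1 u'.2 = false := by
          intro u' hu'
          have := hl2 u' hu'
          revert this; cases (pvStepDirs maps n m y x p k (rest, v)).2 u'.1 u'.2 <;> simp
        have hch2 : List.IsChain (pvPAdj maps n m) (u :: l2) := by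
          rw [hsplit] at hch
          have : pvPst e :: (l1 ++ u :: l2) = (pvPst e :: l1) ++ u :: l2 := by simp
          rw [this] at hch
          exact (List.isChain_split.mp hch).2
        have hend2 : pvEndOf u l2 = pvEndOf (pvPst e) w0 := by
          rw [hsplit, pvEndOf_append]
        have hstep'' : e''.2.2.2 = k + 1 := (hpadjn e'' he'').1
        refine ⟨(k + 1).toNat + l2.length,
          ⟨e'', by rw [hq]; exact List.mem_append.mpr (Or.inr he''),
           l2, by rw [hpe'']; exact hch2, by rw [hpe'', hend2]; exact hcE,
           by rw [hpe'', hend2]; exact hsT, hl2av, by rw [hstep'']⟩, ?_⟩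
        have hke : k ≤ e.2.2.2 := (hle e he).1
        have hlen : w0.length = l1.length + 1 + l2.length := by rw [hsplit]; simp; omega
        omega
  have hNO : ∀ t ∈ pvM maps n m (pvStepDirs maps n m y x p k (rest, v)).1
        (pvStepDirs maps n m y x p k (rest, v)).2,
      ∃ t' ∈ pvM maps n m ((y, x, p, k) :: rest) v, t' ≤ t := by
    -- every total of the new state is matched by one at most as large in the old state
    rintro t ⟨e, he, w0, hch, hcE, hsT, hav, ht⟩
    have havv : ∀ u ∈ w0, v u.1 u.2 = false := fun u hu => (hptF u (hav u hu)).1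
    rw [hq] at he
    rcases List.mem_append.mp he with he | he
    · exact ⟨t, ⟨e, List.mem_cons_of_mem _ he, w0, hch, hcE, hsT, havv, ht⟩, le_refl t⟩
    · -- a fresh entry: prepend the popped head, or reuse an older entry at the same state
      have hstep'' : e.2.2.2 = k + 1 := (hpadjn e he).1
      have hpadj1 : pvPAdj maps n m ((y, x), p) (pvPst e) := (hpadjn e he).2
      rcases hfresh e he with hf | ⟨hsTrue, hpfalse, hLc⟩
      case inl hf =>
        -- genuinely fresh: prepend the head
        refine ⟨t, ⟨(y, x, p, k), List.mem_cons_self .., pvPst e :: w0,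
          ?_, ?_, ?_, ?_, ?_⟩, le_refl t⟩
        · exact List.isChain_cons_cons.mpr ⟨by simpa [pvPst] using hpadj1, hch⟩
        · rw [pvEndOf_cons]; exact hcE
        · rw [pvEndOf_cons]; exact hsT
        · intro u hu
          rcases List.mem_cons.mp hu with hu | hu
          · rw [hu]; exact hf
          · exact havv u hu
        · simp only [List.length_cons, ht, hstep'']
          omega
      case inr =>
        by_cases hvold : v (pvPst e).1 (pvPst e).2 = false
        · -- still fresh in v: same construction
          refine ⟨t, ⟨(y, x, p, k), List.mem_cons_self .., pvPst e :: w0,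
            ?_, ?_, ?_, ?_, ?_⟩, le_refl t⟩
          · exact List.isChain_cons_cons.mpr ⟨by simpa [pvPst] using hpadj1, hch⟩
          · rw [pvEndOf_cons]; exact hcE
          · rw [pvEndOf_cons]; exact hsT
          · intro u hu
            rcases List.mem_cons.mp hu with hu | hu
            · rw [hu]; exact hvold
            · exact havv u hu
          · simp only [List.length_cons, ht, hstep'']
            omega
        · have hvtrue : v (pvPst e).1 (pvPst e).2 = true := by
            revert hvold; cases v (pvPst e).1 (pvPst e).2 <;> simp
          by_cases hinq : ∃ e0 ∈ (y, x, p, k) :: rest, pvPst e0 = pvPst e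
          · -- an older queue entry carries the same state, with no larger steps
            rcases hinq with ⟨e0, he0, hpe0⟩
            refine ⟨e0.2.2.2.toNat + w0.length,
              ⟨e0, he0, w0, by rw [hpe0]; exact hch, by rw [hpe0]; exact hcE,
               by rw [hpe0]; exact hsT, havv, rfl⟩, ?_⟩
            have := (hle e0 he0).2
            rw [ht, hstep'']
            omega
          · -- closed state: its successors are all marked, so the walk must stop immediately
            exfalso
            push Not at hinq
            have hcl := hclosed (pvPst e) hvtrue hinq
            rcases w0 with _ | ⟨u1, w1⟩
            · -- the end would be an E cell carrying a lever
              have hcL : pvCell maps (pvPst e).1.1 (pvPst e).1.2 = 'L' := hLc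
              have hcEE : pvCell maps (pvPst e).1.1 (pvPst e).1.2 = 'E' := by
                simpa [pvEndOf] using hcE
              rw [hcL] at hcEE
              simp at hcEE
            · have hadj1 : pvPAdj maps n m (pvPst e) u1 :=
                (List.isChain_cons_cons.mp hch).1
              have := hcl u1 hadj1
              rw [havv u1 (List.mem_cons_self ..)] at this
              simp at this
  exact pvOptMin_congr _ _ (pv_minset_eq _ _ hNO hON).1 (pv_minset_eq _ _ hNO hON).2

lemma pvAns_nil (maps : List String) (n m : Int) (v : Int × Int → Bool → Bool) :
    pvAns maps n m [] v = -1 := by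
  classical
  unfold pvAns pvOptMin
  rw [if_neg]
  rintro ⟨t, e, he, -⟩
  simp at he

lemma pvMeas_pos (n m : Int) (e : Int × Int × Bool × Int) (rest : List (Int × Int × Bool × Int))
    (v : Int × Int → Bool → Bool) : 0 < pvMeas n m (e :: rest) v := by
  have : 0 < pvQn (e :: rest) false + pvQn (e :: rest) true := by
    rcases hp : e.2.2.1 with _ | _ <;> simp [pvQn, hp]
  unfold pvMeas
  omega

lemma pvLoopA_eq_ans (maps : List String) (n m : Int) :
    ∀ (N : ℕ) (q : List (Int × Int × Bool × Int)) (v : Int × Int → Bool → Bool),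
      pvMeas n m q v ≤ N → pvInv maps n m q v →
      pvLoopA maps n m q v = pvAns maps n m q v := by
  intro N
  induction N with
  | zero =>
    intro q v hm hinv
    cases q with
    | nil => rw [pvLoopA, pvAns_nil]
    | cons e rest =>
      exfalso
      have := pvMeas_pos n m e rest v
      omega
  | succ N ih =>
    intro q v hm hinv
    cases q with
    | nil => rw [pvLoopA, pvAns_nil]
    | cons hd rest =>
      obtain ⟨y, x, p, k⟩ := hd
      rw [pvLoopA]
      by_cases hE : pvCell maps y x = 'E' ∧ p = true
      · rw [if_pos hE]
        exact (pvAns_return maps n m y x p k rest v hinv hE).symm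
      · rw [if_neg hE]
        have hstep := pvStep_preserve maps n m y x p k rest v hinv hE
        have hms := pvMeas_step maps n m y x p k rest v
        have hrec := ih (pvStepDirs maps n m y x p k (rest, v)).1
          (pvStepDirs maps n m y x p k (rest, v)).2 (by omega) hstep.1
        rw [hrec, hstep.2]

-- ---------- initial state of A ----------

lemma pvFoldSetV_iff (l : List (Int × Int × Bool × Int)) :
    ∀ (v : Int × Int → Bool → Bool) (c : Int × Int) (q : Bool),
      (l.foldl (fun v e => pvSetV v e.1 e.2.1 false) v) c q = true ↔
        (v c q = true ∨ ∃ e ∈ l, (e.1, e.2.1) = c ∧ q = false) := by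
  induction l with
  | nil => intro v c q; simp
  | cons e l ih =>
    intro v c q
    simp only [List.foldl_cons]
    rw [ih]
    rw [pvSetV_true_iff]
    constructor
    · rintro ((⟨h1, h2⟩ | h1) | h1)
      · exact Or.inr ⟨e, List.mem_cons_self .., by rw [h1], h2⟩
      · exact Or.inl h1
      · rcases h1 with ⟨e', he', hh⟩
        exact Or.inr ⟨e', List.mem_cons_of_mem _ he', hh⟩
    · rintro (h1 | ⟨e', he', hh1, hh2⟩)
      · exact Or.inl (Or.inr h1)
      · rcases List.mem_cons.mp he' with he' | he'
        · subst he'; exact Or.inl (Or.inl ⟨hh1.symm, hh2⟩)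
        · exact Or.inr ⟨e', he', hh1, hh2⟩

lemma pvQ0_mem (maps : List String) (n m : Int) (ch : Char) (e : Int × Int × Bool × Int) :
    e ∈ (PySem.List.pyRange 0 n 1).flatMap (fun i =>
      ((PySem.List.pyRange 0 m 1).filter (fun j => pvCell maps i j == ch)).map
        (fun j => (i, j, false, (0 : Int)))) ↔
    (0 ≤ e.1 ∧ e.1 < n ∧ 0 ≤ e.2.1 ∧ e.2.1 < m ∧ pvCell maps e.1 e.2.1 = ch ∧
      e.2.2.1 = false ∧ e.2.2.2 = 0) := by
  simp only [List.mem_flatMap, List.mem_map, List.mem_filter, PySem.List.mem_pyRange_one]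
  constructor
  · rintro ⟨i, ⟨hi0, hin⟩, j, ⟨⟨hj0, hjm⟩, hcell⟩, he⟩
    subst he
    exact ⟨hi0, hin, hj0, hjm, by simpa using hcell, rfl, rfl⟩
  · rintro ⟨h1, h2, h3, h4, h5, h6, h7⟩
    refine ⟨e.1, ⟨h1, h2⟩, e.2.1, ⟨⟨h3, h4⟩, by simpa using h5⟩, ?_⟩
    obtain ⟨a, b, c, d⟩ := e
    simp only at h6 h7 ⊢
    rw [h6, h7]

lemma pvAns_init_eq (maps : List String) :
    solution maps =
      pvOptMin (pvAnsSet maps (maps.length : Int)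
          ((((PySem.List.pyGet? maps 0).getD "").toList.length : Int))) := by
  classical
  have hsol : solution maps = pvLoopA maps (maps.length : Int)
      ((((PySem.List.pyGet? maps 0).getD "").toList.length : Int))
      ((PySem.List.pyRange 0 (maps.length : Int) 1).flatMap (fun i =>
        ((PySem.List.pyRange 0 ((((PySem.List.pyGet? maps 0).getD "").toList.length : Int)) 1).filter
            (fun j => pvCell maps i j == 'S')).map
          (fun j => (i, j, false, (0 : Int)))))
      (((PySem.List.pyRange 0 (maps.length : Int) 1).flatMap (fun i =>
        ((PySem.List.pyRange 0 ((((PySem.List.pyGet? maps 0).getD "").toList.length : Int)) 1).filter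
            (fun j => pvCell maps i j == 'S')).map
          (fun j => (i, j, false, (0 : Int))))).foldl
        (fun v e => pvSetV v e.1 e.2.1 false) (fun _ _ => false)) := rfl
  rw [hsol]
  set n : Int := (maps.length : Int) with hn
  set m : Int := ((((PySem.List.pyGet? maps 0).getD "").toList.length : Int)) with hm
  set q0 := (PySem.List.pyRange 0 n 1).flatMap (fun i =>
      ((PySem.List.pyRange 0 m 1).filter (fun j => pvCell maps i j == 'S')).map
        (fun j => (i, j, false, (0 : Int)))) with hq0
  set v0 := q0.foldl (fun v e => pvSetV v e.1 e.2.1 false) (fun _ _ => false) with hv0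
  have hq0mem : ∀ e, e ∈ q0 ↔ (0 ≤ e.1 ∧ e.1 < n ∧ 0 ≤ e.2.1 ∧ e.2.1 < m ∧
      pvCell maps e.1 e.2.1 = 'S' ∧ e.2.2.1 = false ∧ e.2.2.2 = 0) :=
    fun e => pvQ0_mem maps n m 'S' e
  have hv0mem : ∀ (c : Int × Int) (q : Bool), v0 c q = true ↔
      (∃ e ∈ q0, (e.1, e.2.1) = c ∧ q = false) := by
    intro c q
    rw [hv0, pvFoldSetV_iff]
    simp
  have hinv : pvInv maps n m q0 v0 := by
    refine ⟨⟨0, q0.length, 0, ?_⟩, ?_, ?_, ?_, ?_⟩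
    · rw [List.replicate_zero, List.append_nil]
      rw [List.eq_replicate_of_mem (l := q0.map (fun e => e.2.2.2)) (a := ((0 : ℕ) : ℤ)) ?_,
        List.length_map]
      intro z hz
      rcases List.mem_map.mp hz with ⟨e, he, hze⟩
      rw [← hze]
      simpa using ((hq0mem e).mp he).2.2.2.2.2.2
    · intro e he
      rcases (hq0mem e).mp he with ⟨h1, h2, h3, h4, h5, -⟩
      exact ⟨h1, h2, h3, h4, by rw [h5]; decide⟩
    · intro e he
      rw [hv0mem]
      exact ⟨e, he, rfl, ((hq0mem e).mp he).2.2.2.2.2.1⟩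
    · intro st hst hnq t hadj
      exfalso
      rcases (hv0mem st.1 st.2).mp hst with ⟨e, he, hh1, hh2⟩
      refine hnq e he ?_
      have hfalse := ((hq0mem e).mp he).2.2.2.2.2.1
      unfold pvPst
      rw [hfalse, hh1, ← hh2]
    · intro c hc
      by_cases h : v0 c false = true
      · exfalso
        rcases (hv0mem c false).mp h with ⟨e, he, hh1, -⟩
        have hS := ((hq0mem e).mp he).2.2.2.2.1
        have hc1 : e.1 = c.1 := by rw [← hh1]
        have hc2 : e.2.1 = c.2 := by rw [← hh1]
        rw [hc1, hc2] at hS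
        rw [hS] at hc
        simp at hc
      · revert h; cases v0 c false <;> simp
  rw [pvLoopA_eq_ans maps n m (pvMeas n m q0 v0) q0 v0 (le_refl _) hinv]
  unfold pvAns
  have hMA : ∀ t ∈ pvM maps n m q0 v0, ∃ t' ∈ pvAnsSet maps n m, t' ≤ t := by
    rintro t ⟨e, he, w0, hch, hcE, hsT, hav, ht⟩
    rcases (hq0mem e).mp he with ⟨h1, h2, h3, h4, h5, h6, h7⟩
    refine ⟨w0.length, ⟨pvPst e, w0, hch, ?_, ?_, hcE, hsT, rfl⟩, ?_⟩
    · exact ⟨h1, h2, h3, h4, h5⟩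
    · simpa [pvPst] using h6
    · rw [ht, h7]
      simp
  have hAM : ∀ t ∈ pvAnsSet maps n m, ∃ t' ∈ pvM maps n m q0 v0, t' ≤ t := by
    rintro t ⟨st, w0, hch, hsrc, hsf, hcE, hsT, ht⟩
    by_cases hall : ∀ u ∈ w0, v0 u.1 u.2 = false
    · have hps : pvPst (st.1.1, st.1.2, false, 0) = st := by
        unfold pvPst; simp only; rw [← hsf]
      refine ⟨t, ⟨(st.1.1, st.1.2, false, 0), ?_, w0, by rw [hps]; exact hch,
        by rw [hps]; exact hcE, by rw [hps]; exact hsT, hall, ?_⟩, le_refl t⟩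
      · rw [hq0mem]
        exact ⟨hsrc.1, hsrc.2.1, hsrc.2.2.1, hsrc.2.2.2.1, hsrc.2.2.2.2, rfl, rfl⟩
      · simpa using ht.symm
    · push Not at hall
      have hex : ∃ u ∈ w0, v0 u.1 u.2 = true := by
        rcases hall with ⟨u, hu, hvu⟩
        exact ⟨u, hu, by revert hvu; cases v0 u.1 u.2 <;> simp⟩
      rcases pv_exists_last_split (fun u => v0 u.1 u.2 = true) w0 hex with
        ⟨l1, u, l2, hsplit, hu, hl2⟩
      rcases (hv0mem u.1 u.2).mp hu with ⟨e, he, hh1, hh2⟩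
      have hl2av : ∀ u' ∈ l2, v0 u'.1 u'.2 = false := by
        intro u' hu'
        have := hl2 u' hu'
        revert this; cases v0 u'.1 u'.2 <;> simp
      have hpste : pvPst e = u := by
        unfold pvPst
        rw [((hq0mem e).mp he).2.2.2.2.2.1, hh1]
        exact Prod.ext rfl hh2.symm
      have hch2 : List.IsChain (pvPAdj maps n m) (u :: l2) := by
        rw [hsplit] at hch
        have : st :: (l1 ++ u :: l2) = (st :: l1) ++ u :: l2 := by simp
        rw [this] at hch
        exact (List.isChain_split.mp hch).2
      have hend2 : pvEndOf u l2 = pvEndOf st w0 := by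
        rw [hsplit, pvEndOf_append]
      refine ⟨(0 : ℕ) + l2.length,
        ⟨e, he, l2, by rw [hpste]; exact hch2, by rw [hpste, hend2]; exact hcE,
         by rw [hpste, hend2]; exact hsT, hl2av, ?_⟩, ?_⟩
      · rw [((hq0mem e).mp he).2.2.2.2.2.2]
        simp
      · rw [← ht, hsplit]
        simp only [List.length_append, List.length_cons]
        omega

  exact pvOptMin_congr _ _ (pv_minset_eq _ _ hMA hAM).1 (pv_minset_eq _ _ hMA hAM).2

-- ---------- walk utilities ----------

lemma pvEndOfP_cons (s c : Int × Int) (w : List (Int × Int)) :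
    pvEndOfP s (c :: w) = pvEndOfP c w := by
  simp [pvEndOfP, List.getLast_cons]

lemma pvEndOfP_append (l1 : List (Int × Int)) :
    ∀ (s u : Int × Int) (l2 : List (Int × Int)),
      pvEndOfP s (l1 ++ u :: l2) = pvEndOfP u l2 := by
  induction l1 with
  | nil => intro s u l2; simp [pvEndOfP_cons s u l2]
  | cons c l1 ih =>
    intro s u l2
    rw [List.cons_append, pvEndOfP_cons]
    exact ih c u l2

lemma pvSrc_pass {maps : List String} {n m : Int} {ch : Char} {c : Int × Int}
    (h : pvSrc maps n m ch c) (hch : ch ≠ 'X') : pvPass maps n m c :=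
  ⟨h.1, h.2.1, h.2.2.1, h.2.2.2.1, by rw [h.2.2.2.2]; exact hch⟩

lemma pvProj_chain {maps : List String} {n m : Int} {ws : List ((Int × Int) × Bool)}
    (h : List.IsChain (pvPAdj maps n m) ws) :
    List.IsChain (pvAdj maps n m) (ws.map Prod.fst) := by
  rw [List.isChain_map]
  exact h.imp_of_mem_imp (fun a b _ _ hab => hab.1)

lemma pvEnd_map (s : (Int × Int) × Bool) (rest : List ((Int × Int) × Bool)) :
    (pvEndOf s rest).1 = pvEndOfP s.1 (rest.map Prod.fst) := by
  unfold pvEndOf pvEndOfP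
  have : (s :: rest).map Prod.fst = s.1 :: rest.map Prod.fst := by simp
  rw [← List.getLast_map (f := Prod.fst) (l := s :: rest) (by simp)]
  congr 1

lemma pvRev_mem {maps : List String} {n m : Int} {s : Int × Int} {rest : List (Int × Int)}
    (hch : List.IsChain (pvAdj maps n m) (s :: rest)) :
    ∃ rest', List.IsChain (pvAdj maps n m) (pvEndOfP s rest :: rest') ∧
      pvEndOfP (pvEndOfP s rest) rest' = s ∧ rest'.length = rest.length := by
  have hne : (s :: rest) ≠ [] := by simp
  have hrne : (s :: rest).reverse ≠ [] := by simp
  obtain ⟨r0, rrest, hr⟩ := List.exists_cons_of_ne_nil hrne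
  have hrch : List.IsChain (pvAdj maps n m) ((s :: rest).reverse) := by
    rw [List.isChain_reverse]
    exact hch.imp_of_mem_imp (fun a b _ _ hab => pvAdj_symm maps n m a b hab)
  have hr0 : r0 = pvEndOfP s rest := by
    have h1 : (s :: rest).reverse.head? = (s :: rest).getLast? := List.head?_reverse
    rw [hr] at h1
    have hgl : (s :: rest).getLast? = some (pvEndOfP s rest) := by
      rw [List.getLast?_eq_some_getLast hne]
      rfl
    rw [hgl] at h1
    simpa using h1
  have hlen : rrest.length = rest.length := by
    have := congrArg List.length hr
    simp at this
    omega
  have hend : pvEndOfP r0 rrest = s := by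
    have h2 : (s :: rest).reverse.getLast? = (s :: rest).head? := List.getLast?_reverse
    rw [hr] at h2
    have hgl : (r0 :: rrest).getLast? = some (pvEndOfP r0 rrest) := by
      rw [List.getLast?_eq_some_getLast (by simp)]
      rfl
    rw [hgl] at h2
    simpa using h2
  rw [hr] at hrch
  rw [hr0] at hrch hend
  exact ⟨rrest, hrch, hend, hlen⟩

lemma pvWalk_all_pass {maps : List String} {n m : Int} :
    ∀ (rest : List (Int × Int)) (s : Int × Int),
      List.IsChain (pvAdj maps n m) (s :: rest) → pvPass maps n m s →
      ∀ u ∈ s :: rest, pvPass maps n m u := by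
  intro rest
  induction rest with
  | nil =>
    intro s _ hp u hu
    rcases List.mem_cons.mp hu with h | h
    · rw [h]; exact hp
    · simp at h
  | cons c rest ih =>
    intro s hch hp u hu
    have hcc := List.isChain_cons_cons.mp hch
    rcases List.mem_cons.mp hu with h | h
    · rw [h]; exact hp
    · exact ih c hcc.2 hcc.1.2.1 u h

-- canonical lever states along a plain walk
def pvLiftT (maps : List String) : Bool → List (Int × Int) → List ((Int × Int) × Bool)
  | _, [] => []
  | p, c :: l =>
    (c, p || (pvCell maps c.1 c.2 == 'L')) :: pvLiftT maps (p || (pvCell maps c.1 c.2 == 'L')) l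

lemma pvLiftT_length (maps : List String) :
    ∀ (l : List (Int × Int)) (p : Bool), (pvLiftT maps p l).length = l.length := by
  intro l
  induction l with
  | nil => intro p; simp [pvLiftT]
  | cons c l ih => intro p; simp [pvLiftT, ih]

lemma pvLiftT_chain (maps : List String) (n m : Int) :
    ∀ (l : List (Int × Int)) (c : Int × Int) (p : Bool),
      List.IsChain (pvAdj maps n m) (c :: l) →
      List.IsChain (pvPAdj maps n m) ((c, p) :: pvLiftT maps p l) := by
  intro l
  induction l with
  | nil => intro c p _; simp [pvLiftT]
  | cons c' l ih =>
    intro c p hch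
    have hcc := List.isChain_cons_cons.mp hch
    simp only [pvLiftT]
    exact List.isChain_cons_cons.mpr ⟨⟨hcc.1, rfl⟩, ih c' _ hcc.2⟩

lemma pvLiftT_end (maps : List String) :
    ∀ (l : List (Int × Int)) (c : Int × Int) (p : Bool),
      pvEndOf (c, p) (pvLiftT maps p l) =
        (pvEndOfP c l, p || l.any (fun c' => pvCell maps c'.1 c'.2 == 'L')) := by
  intro l
  induction l with
  | nil => intro c p; simp [pvLiftT, pvEndOf, pvEndOfP]
  | cons c' l ih =>
    intro c p
    simp only [pvLiftT]
    rw [pvEndOf_cons, pvEndOfP_cons, ih]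
    simp only [List.any_cons]
    congr 1
    cases p <;> cases hl : pvCell maps c'.1 c'.2 == 'L' <;> simp

-- ---------- decomposition: product walks = S-distance + E-distance through a lever ----------

lemma pvGraft (maps : List String) (n m : Int) :
    ∀ (r1 : List (Int × Int)) (s : Int × Int) (r2' : List (Int × Int)),
      List.IsChain (pvAdj maps n m) (s :: r1) →
      List.IsChain (pvAdj maps n m) (pvEndOfP s r1 :: r2') →
      List.IsChain (pvAdj maps n m) (s :: (r1 ++ r2')) ∧
        pvEndOfP s (r1 ++ r2') = pvEndOfP (pvEndOfP s r1) r2' := by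
  intro r1
  induction r1 with
  | nil =>
    intro s r2' _ h2
    have he : pvEndOfP s [] = s := by simp [pvEndOfP]
    rw [he] at h2
    refine ⟨by simpa using h2, by simp [he]⟩
  | cons w r1' ih =>
    intro s r2' h1 h2
    have hcc := List.isChain_cons_cons.mp h1
    rw [pvEndOfP_cons] at h2
    rcases ih w r2' hcc.2 h2 with ⟨hc, he⟩
    constructor
    · exact List.isChain_cons_cons.mpr ⟨hcc.1, hc⟩
    · rw [List.cons_append, pvEndOfP_cons, he, pvEndOfP_cons]

lemma pvAnsSet_eq_T (maps : List String) (n m : Int) :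
    ((pvAnsSet maps n m).Nonempty ↔ (pvT maps n m).Nonempty) ∧
    sInf (pvAnsSet maps n m) = sInf (pvT maps n m) := by
  classical
  have hAT : ∀ t ∈ pvAnsSet maps n m, ∃ t' ∈ pvT maps n m, t' ≤ t := by
    rintro t ⟨s, rest, hch, hsrc, hsf, hcE, hsT, ht⟩
    have hex : ∃ u ∈ s :: rest, u.2 = false := ⟨s, List.mem_cons_self .., hsf⟩
    rcases pv_exists_last_split (fun u => u.2 = false) (s :: rest) hex with
      ⟨l1, u, l2, hsplit, hu, hl2⟩
    have hglA : (s :: rest).getLast? = some (pvEndOf s rest) := by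
      rw [List.getLast?_eq_some_getLast (by simp)]
      rfl
    rcases l2 with _ | ⟨u', l2'⟩
    · -- impossible: the last node would carry state false
      exfalso
      have : (s :: rest).getLast? = some u := by
        rw [hsplit]
        exact List.getLast?_concat
      rw [hglA] at this
      have := Option.some.inj this
      rw [← this] at hu
      rw [hsT] at hu
      simp at hu
    · -- the edge u → u' flips the state: u' is a lever
      have hchs := hch
      rw [hsplit] at hchs
      have hedge : pvPAdj maps n m u u' := (List.isChain_append_cons_cons.mp hchs).2.1
      have hu't : u'.2 = true := by
        have := hl2 u' (List.mem_cons_self ..)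
        revert this; cases u'.2 <;> simp
      have hu'L : pvCell maps u'.1.1 u'.1.2 = 'L' := by
        have h2 := hedge.2
        rw [hu't, hu] at h2
        simpa using h2.symm
      have hpassu' : pvPass maps n m u'.1 := hedge.1.2.1
      -- prefix and suffix product chains
      have hsplit2 : s :: rest = (l1 ++ [u]) ++ u' :: l2' := by
        rw [hsplit]; simp
      have hchs2 := hch
      rw [hsplit2] at hchs2
      have hPre := (List.isChain_split.mp hchs2).1
      have hSuf := (List.isChain_split.mp hchs2).2
      -- write the prefix head-explicitly: l1 ++ [u] = s :: T
      obtain ⟨h0, T, hl1⟩ := List.exists_cons_of_ne_nil (l := l1 ++ [u]) (by simp)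
      have hT : h0 = s ∧ T ++ u' :: l2' = rest := by
        have h3 : (h0 :: T) ++ u' :: l2' = s :: rest := by
          rw [← hl1, ← hsplit2]
        rw [List.cons_append] at h3
        exact ⟨(List.cons.injEq .. ▸ h3).1, (List.cons.injEq .. ▸ h3).2⟩
      -- prefix as a plain walk from the S cell to the lever
      have hPre2 : List.IsChain (pvPAdj maps n m) (s :: (T ++ [u'])) := by
        rw [hl1, hT.1] at hPre
        simpa using hPre
      have hPreP : List.IsChain (pvAdj maps n m)
          (s.1 :: (T.map Prod.fst ++ [u'.1])) := by
        have := pvProj_chain hPre2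
        simpa using this
      have hPend : pvEndOfP s.1 (T.map Prod.fst ++ [u'.1]) = u'.1 := by
        rw [pvEndOfP_append (T.map Prod.fst) s.1 u'.1 []]
        simp [pvEndOfP]
      have haS : (T.map Prod.fst ++ [u'.1]).length ∈ pvDSet maps n m 'S' u'.1 :=
        ⟨s.1, T.map Prod.fst ++ [u'.1], hPreP, hsrc, pvSrc_pass hsrc (by decide), hPend, rfl⟩
      -- suffix as a plain walk from the lever to the E cell, then reversed
      have hSufP : List.IsChain (pvAdj maps n m) (u'.1 :: l2'.map Prod.fst) := by
        have := pvProj_chain hSuf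
        simpa using this
      have hSend : pvEndOfP u'.1 (l2'.map Prod.fst) = (pvEndOf s rest).1 := by
        rw [pvEnd_map]
        have hrw : rest.map Prod.fst = (T ++ u' :: l2').map Prod.fst := by rw [hT.2]
        rw [hrw]
        simp only [List.map_append, List.map_cons]
        rw [pvEndOfP_append]
      rcases pvRev_mem hSufP with ⟨r'', hr1, hr2, hr3⟩
      rw [hSend] at hr1 hr2
      have hpassE : pvPass maps n m (pvEndOf s rest).1 := by
        refine pvWalk_all_pass (l2'.map Prod.fst) u'.1 hSufP hpassu' _ ?_
        rw [← hSend]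
        exact List.getLast_mem _
      have hbE : l2'.length ∈ pvDSet maps n m 'E' u'.1 := by
        refine ⟨(pvEndOf s rest).1, r'', hr1, ?_, hpassE, hr2, by rw [hr3]; simp⟩
        exact ⟨hpassE.1, hpassE.2.1, hpassE.2.2.1, hpassE.2.2.2.1, hcE⟩
      refine ⟨sInf (pvDSet maps n m 'S' u'.1) + sInf (pvDSet maps n m 'E' u'.1),
        ⟨u'.1, ⟨hpassu'.1, hpassu'.2.1, hpassu'.2.2.1, hpassu'.2.2.2.1, hu'L⟩,
         ⟨_, haS⟩, ⟨_, hbE⟩, rfl⟩, ?_⟩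
      have h1 := Nat.sInf_le haS
      have h2 := Nat.sInf_le hbE
      have hlen : rest.length = T.length + 1 + l2'.length := by
        rw [← hT.2]
        simp
        omega
      simp only [List.length_append, List.length_map, List.length_cons,
        List.length_nil] at h1
      omega
  have hTA : ∀ t ∈ pvT maps n m, ∃ t' ∈ pvAnsSet maps n m, t' ≤ t := by
    rintro t ⟨c, hsrcL, hDS, hDE, ht⟩
    obtain ⟨s, r1, hch1, hsrcS, hpassS, hend1, hlen1⟩ := Nat.sInf_mem hDS
    obtain ⟨e0, r2, hch2, hsrcE, hpassE, hend2, hlen2⟩ := Nat.sInf_mem hDE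
    rcases pvRev_mem hch2 with ⟨r2', hrch, hrend, hrlen⟩
    rw [hend2] at hrch hrend
    have hgr := pvGraft maps n m r1 s r2' hch1 (by rw [hend1]; exact hrch)
    have hgrend : pvEndOfP s (r1 ++ r2') = e0 := by
      rw [hgr.2, hend1, hrend]
    -- the lever cell c lies on the tail of the combined walk
    have hcr1 : c ∈ r1 := by
      rcases r1 with _ | ⟨w, r1''⟩
      · exfalso
        have : s = c := by simpa [pvEndOfP] using hend1
        have h1 := hsrcS.2.2.2.2
        rw [this, hsrcL.2.2.2.2] at h1
        simp at h1
      · have : pvEndOfP s (w :: r1'') = pvEndOfP w r1'' := pvEndOfP_cons ..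
        rw [this] at hend1
        rw [← hend1]
        exact List.getLast_mem _
    refine ⟨t, ⟨(s, false), pvLiftT maps false (r1 ++ r2'), ?_, hsrcS, rfl, ?_, ?_, ?_⟩,
      le_refl t⟩
    · exact pvLiftT_chain maps n m (r1 ++ r2') s false hgr.1
    · rw [pvLiftT_end]
      simp only
      rw [hgrend]
      exact hsrcE.2.2.2.2
    · rw [pvLiftT_end]
      simp only [Bool.false_or]
      rw [List.any_eq_true]
      exact ⟨c, List.mem_append_left _ hcr1, by simp [hsrcL.2.2.2.2]⟩
    · rw [pvLiftT_length]
      rw [List.length_append, hlen1, hrlen, hlen2, ht]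
  exact ⟨(pv_minset_eq _ _ hAT hTA).1, (pv_minset_eq _ _ hAT hTA).2⟩

-- ---------- B computes pvT ----------

lemma pvDSet_pass {maps : List String} {n m : Int} {ch : Char} {c : Int × Int}
    (h : (pvDSet maps n m ch c).Nonempty) : pvPass maps n m c := by
  rcases h with ⟨l, s, rest, hch, hsrc, hpass, hend, hlen⟩
  have := pvWalk_all_pass rest s hch hpass (pvEndOfP s rest) ?_
  · rwa [hend] at this
  · unfold pvEndOfP
    exact List.getLast_mem _

lemma pvDSet_zero_iff {maps : List String} {n m : Int} {ch : Char} {c : Int × Int}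
    (hch : ch ≠ 'X') : 0 ∈ pvDSet maps n m ch c ↔ pvSrc maps n m ch c := by
  constructor
  · rintro ⟨s, rest, hchn, hsrc, hpass, hend, hlen⟩
    rw [List.length_eq_zero_iff] at hlen
    subst hlen
    have : s = c := by simpa [pvEndOfP] using hend
    rwa [this] at hsrc
  · intro hsrc
    exact ⟨c, [], List.isChain_singleton _, hsrc, pvSrc_pass hsrc hch, by simp [pvEndOfP], rfl⟩

lemma pvDSet_ext {maps : List String} {n m : Int} {ch : Char} {f c : Int × Int}
    (hadj : pvAdj maps n m f c) {l : ℕ} (hl : l ∈ pvDSet maps n m ch f) :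
    l + 1 ∈ pvDSet maps n m ch c := by
  rcases hl with ⟨s, rest, hchn, hsrc, hpass, hend, hlen⟩
  have h2 : List.IsChain (pvAdj maps n m) (pvEndOfP s rest :: [c]) := by
    rw [hend]
    exact (List.isChain_pair).mpr hadj
  rcases pvGraft maps n m rest s [c] hchn h2 with ⟨hc, he⟩
  refine ⟨s, rest ++ [c], hc, hsrc, hpass, ?_, by simp [hlen]⟩
  rw [he]
  simp [pvEndOfP]

lemma pvSnoc {maps : List String} {n m : Int} :
    ∀ (r : List (Int × Int)) (s c : Int × Int),
      List.IsChain (pvAdj maps n m) (s :: (r ++ [c])) →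
      List.IsChain (pvAdj maps n m) (s :: r) ∧ pvAdj maps n m (pvEndOfP s r) c := by
  intro r
  induction r with
  | nil =>
    intro s c h
    simp only [List.nil_append] at h
    exact ⟨List.isChain_singleton _, by simpa [pvEndOfP] using (List.isChain_pair).mp h⟩
  | cons w r ih =>
    intro s c h
    rw [List.cons_append] at h
    have hcc := List.isChain_cons_cons.mp h
    rcases ih w c hcc.2 with ⟨h1, h2⟩
    exact ⟨List.isChain_cons_cons.mpr ⟨hcc.1, h1⟩, by rwa [pvEndOfP_cons]⟩

lemma pvDSet_dec {maps : List String} {n m : Int} {ch : Char} {c : Int × Int} {l : ℕ}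
    (hl : l + 1 ∈ pvDSet maps n m ch c) :
    ∃ f, pvAdj maps n m f c ∧ l ∈ pvDSet maps n m ch f := by
  rcases hl with ⟨s, rest, hchn, hsrc, hpass, hend, hlen⟩
  have hne : rest ≠ [] := by
    intro h; rw [h] at hlen; simp at hlen
  obtain ⟨r, a, hra⟩ : ∃ (r : List (Int × Int)) (a : Int × Int), rest = r ++ [a] :=
    ⟨rest.dropLast, rest.getLast hne, (List.dropLast_concat_getLast hne).symm⟩
  subst hra
  have hac : a = c := by
    have := pvEndOfP_append r s a []
    rw [this] at hend
    simpa [pvEndOfP] using hend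
  subst hac
  rcases pvSnoc r s a hchn with ⟨h1, h2⟩
  refine ⟨pvEndOfP s r, h2, s, r, h1, hsrc, hpass, rfl, ?_⟩
  have : (r ++ [a]).length = l + 1 := hlen
  simp at this
  omega

lemma pvDist_succ_ex {maps : List String} {n m : Int} {ch : Char} {c : Int × Int} {d : ℕ}
    (hne : (pvDSet maps n m ch c).Nonempty) (hd : sInf (pvDSet maps n m ch c) = d + 1) :
    ∃ f, pvAdj maps n m f c ∧ (pvDSet maps n m ch f).Nonempty ∧
      sInf (pvDSet maps n m ch f) = d := by
  have hmem := Nat.sInf_mem hne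
  rw [hd] at hmem
  rcases pvDSet_dec hmem with ⟨f, hadj, hdf⟩
  refine ⟨f, hadj, ⟨d, hdf⟩, ?_⟩
  have h1 : sInf (pvDSet maps n m ch f) ≤ d := Nat.sInf_le hdf
  rcases lt_or_ge (sInf (pvDSet maps n m ch f)) d with h2 | h2
  · exfalso
    have := pvDSet_ext hadj (Nat.sInf_mem ⟨d, hdf⟩)
    have hle := Nat.sInf_le this
    omega
  · omega

lemma pvDist_adj_le {maps : List String} {n m : Int} {ch : Char} {f c : Int × Int}
    (hadj : pvAdj maps n m f c) (hf : (pvDSet maps n m ch f).Nonempty) :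
    (pvDSet maps n m ch c).Nonempty ∧
      sInf (pvDSet maps n m ch c) ≤ sInf (pvDSet maps n m ch f) + 1 := by
  have := pvDSet_ext hadj (Nat.sInf_mem hf)
  exact ⟨⟨_, this⟩, Nat.sInf_le this⟩

lemma pv_mem_nbrs (y x : Int) (c : Int × Int) :
    c ∈ pvNbrs y x ↔ (c.1 - y, c.2 - x) ∈ pvDirs := by
  simp only [pvNbrs, pvDirs, List.mem_cons, List.not_mem_nil, or_false, Prod.ext_iff]
  omega

lemma pvOptMin_empty : pvOptMin ∅ = -1 := by
  classical
  unfold pvOptMin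
  rw [if_neg]
  simp [Set.not_nonempty_empty]

lemma pvOptMin_insert (S : Set ℕ) (x : ℕ) :
    pvOptMin (insert x S) =
      (if pvOptMin S = -1 ∨ ((x : ℤ)) < pvOptMin S then (x : ℤ) else pvOptMin S) := by
  classical
  unfold pvOptMin
  by_cases hS : S.Nonempty
  · rw [if_pos hS, if_pos ⟨x, Set.mem_insert ..⟩]
    have hinf : sInf (insert x S) = min x (sInf S) := by
      apply le_antisymm
      · by_cases h : x ≤ sInf S
        · simpa [Nat.min_eq_left h] using Nat.sInf_le (Set.mem_insert ..)
        · rw [Nat.min_eq_right (by omega)]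
          exact Nat.sInf_le (Set.mem_insert_of_mem _ (Nat.sInf_mem hS))
      · apply le_csInf ⟨x, Set.mem_insert ..⟩
        rintro b (hb | hb)
        · subst hb; exact Nat.min_le_left ..
        · exact le_trans (Nat.min_le_right ..) (Nat.sInf_le hb)
    rw [hinf]
    have hSnn : (0 : ℤ) ≤ ((sInf S : ℕ) : ℤ) := by positivity
    by_cases hlt : (x : ℤ) < ((sInf S : ℕ) : ℤ)
    · rw [if_pos (Or.inr hlt)]
      have : min x (sInf S) = x := Nat.min_eq_left (by exact_mod_cast le_of_lt hlt)
      rw [this]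
    · rw [if_neg]
      · have : min x (sInf S) = sInf S := Nat.min_eq_right (by omega)
        rw [this]
      · rintro (h | h)
        · omega
        · exact hlt h
  · rw [if_neg hS, if_pos ⟨x, Set.mem_insert ..⟩]
    rw [if_pos (Or.inl rfl)]
    have : S = ∅ := Set.not_nonempty_iff_eq_empty.mp hS
    rw [this]
    simp

lemma pvFoldMin {α : Type} (P : α → Prop) [DecidablePred P] (val : α → ℤ) :
    ∀ (l : List α), (∀ a ∈ l, P a → 0 ≤ val a) →
    ∀ (S : Set ℕ),
      (l.foldl (fun best a =>
        if P a then (if best = -1 ∨ val a < best then val a else best) else best)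
        (pvOptMin S))
      = pvOptMin (S ∪ { t | ∃ a ∈ l, P a ∧ val a = (t : ℤ) }) := by
  intro l
  induction l with
  | nil =>
    intro _ S
    simp only [List.foldl_nil]
    congr 1
    ext t
    simp
  | cons a l ih =>
    intro hnn S
    simp only [List.foldl_cons]
    by_cases hP : P a
    · rw [if_pos hP]
      have hx : ((val a).toNat : ℤ) = val a := Int.toNat_of_nonneg (hnn a (List.mem_cons_self ..) hP)
      have h1 : (if pvOptMin S = -1 ∨ val a < pvOptMin S then val a else pvOptMin S)
          = pvOptMin (insert (val a).toNat S) := by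
        rw [pvOptMin_insert, hx]
      rw [h1, ih (fun b hb => hnn b (List.mem_cons_of_mem _ hb)) (insert (val a).toNat S)]
      congr 1
      ext t
      simp only [Set.mem_union, Set.mem_insert_iff, Set.mem_setOf_eq, List.mem_cons]
      constructor
      · rintro (h | h)
        · rcases h with h | h
          · subst h
            exact Or.inr ⟨a, Or.inl rfl, hP, hx.symm⟩
          · exact Or.inl h
        · rcases h with ⟨b, hb, hPb, hv⟩
          exact Or.inr ⟨b, Or.inr hb, hPb, hv⟩
      · rintro (h | h)
        · exact Or.inl (Or.inr h)
        · rcases h with ⟨b, hb, hPb, hv⟩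
          rcases hb with hb | hb
          · subst hb
            refine Or.inl (Or.inl ?_)
            have h2 : ((val b).toNat : ℤ) = ((t : ℕ) : ℤ) := by rw [hx, hv]
            exact_mod_cast h2.symm
          · exact Or.inr ⟨b, hb, hPb, hv⟩
    · rw [if_neg hP, ih (fun b hb => hnn b (List.mem_cons_of_mem _ hb)) S]
      congr 1
      ext t
      simp only [Set.mem_union, Set.mem_setOf_eq, List.mem_cons]
      constructor
      · rintro (h | h)
        · exact Or.inl h
        · rcases h with ⟨b, hb, hPb, hv⟩
          exact Or.inr ⟨b, Or.inr hb, hPb, hv⟩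
      · rintro (h | h)
        · exact Or.inl h
        · rcases h with ⟨b, hb, hPb, hv⟩
          rcases hb with hb | hb
          · subst hb; exact absurd hPb hP
          · exact Or.inr ⟨b, hb, hPb, hv⟩


lemma pvBStep_fold_char (maps : List String) (n m : Int) (d' : Int) :
    ∀ (cs : List (Int × Int)) (acc : PySem.Dict (Int × Int) Int × List (Int × Int)),
    ∃ news, (cs.foldl (pvBStep maps n m d') acc).2 = acc.2 ++ news ∧
      (∀ c, (cs.foldl (pvBStep maps n m d') acc).1.get? c =
        if c ∈ news then some d' else acc.1.get? c) ∧
      (∀ c ∈ news, acc.1.contains c = false ∧ pvPass maps n m c ∧ c ∈ cs) ∧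
      (∀ c, acc.1.contains c = true →
        (cs.foldl (pvBStep maps n m d') acc).1.contains c = true) ∧
      (∀ c ∈ cs, pvPass maps n m c →
        (cs.foldl (pvBStep maps n m d') acc).1.contains c = true) ∧
      (acc.1.keys.Nodup → (cs.foldl (pvBStep maps n m d') acc).1.keys.Nodup) := by
  intro cs
  induction cs with
  | nil =>
    intro acc
    exact ⟨[], by simp, by simp, by simp, by simp, by simp, by simp⟩
  | cons c0 cs ih =>
    intro acc
    simp only [List.foldl_cons]
    by_cases hg : 0 ≤ c0.1 ∧ c0.1 < n ∧ 0 ≤ c0.2 ∧ c0.2 < m ∧ pvCell maps c0.1 c0.2 ≠ 'X' ∧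
        acc.1.contains c0 = false
    · have hstep : pvBStep maps n m d' acc c0 = (acc.1.insert c0 d', acc.2 ++ [c0]) := by
        unfold pvBStep
        rw [if_pos hg]
      rw [hstep]
      rcases ih (acc.1.insert c0 d', acc.2 ++ [c0]) with ⟨news, h1, h2, h3, h4, h5, h6⟩
      have hpassc0 : pvPass maps n m c0 := ⟨hg.1, hg.2.1, hg.2.2.1, hg.2.2.2.1, hg.2.2.2.2.1⟩
      refine ⟨c0 :: news, ?_, ?_, ?_, ?_, ?_, ?_⟩
      · rw [h1]; simp
      · intro c
        rw [h2 c]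
        by_cases hcn : c ∈ news
        · rw [if_pos hcn, if_pos (List.mem_cons_of_mem _ hcn)]
        · rw [if_neg hcn]
          by_cases hcc : c = c0
          · subst hcc
            rw [if_pos (List.mem_cons_self ..)]
            simp
          · rw [if_neg (by simp [hcc, hcn]), PySem.Dict.get?_insert]
            rw [if_neg hcc]
      · intro c hc
        rcases List.mem_cons.mp hc with hc | hc
        · subst hc
          exact ⟨hg.2.2.2.2.2, hpassc0, List.mem_cons_self ..⟩
        · rcases h3 c hc with ⟨hc1, hc2, hc3⟩
          refine ⟨?_, hc2, List.mem_cons_of_mem _ hc3⟩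
          simp only [PySem.Dict.contains_insert] at hc1
          exact (Bool.or_eq_false_iff.mp hc1).2
      · intro c hc
        apply h4
        simp [PySem.Dict.contains_insert, hc]
      · intro c hc hpc
        rcases List.mem_cons.mp hc with hc | hc
        · subst hc
          apply h4
          rw [PySem.Dict.contains_insert]
          simp
        · exact h5 c hc hpc
      · intro hnd
        exact h6 (PySem.Dict.nodup_keys_insert _ _ _ hnd)
    · have hstep : pvBStep maps n m d' acc c0 = acc := by
        unfold pvBStep
        rw [if_neg hg]
      rw [hstep]
      rcases ih acc with ⟨news, h1, h2, h3, h4, h5, h6⟩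
      refine ⟨news, h1, h2, fun c hc => ⟨(h3 c hc).1, (h3 c hc).2.1,
        List.mem_cons_of_mem _ (h3 c hc).2.2⟩, h4, ?_, h6⟩
      intro c hc hpc
      rcases List.mem_cons.mp hc with hc | hc
      · subst hc
        apply h4
        by_cases hco : acc.1.contains c = true
        · exact hco
        · exfalso
          rcases hpc with ⟨p1, p2, p3, p4, p5⟩
          exact hg ⟨p1, p2, p3, p4, p5, by revert hco; cases acc.1.contains c <;> simp⟩
      · exact h5 c hc hpc

lemma pvBRound_char (maps : List String) (n m : Int) (d' : Int) :
    ∀ (frontier : List (Int × Int)) (dist : PySem.Dict (Int × Int) Int),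
    ∃ news, (pvBRound maps n m d' frontier dist).2 = news ∧
      (∀ c, (pvBRound maps n m d' frontier dist).1.get? c =
        if c ∈ news then some d' else dist.get? c) ∧
      (∀ c ∈ news, dist.contains c = false ∧ pvPass maps n m c ∧
        ∃ f ∈ frontier, c ∈ pvNbrs f.1 f.2) ∧
      (∀ c, (∃ f ∈ frontier, c ∈ pvNbrs f.1 f.2) → pvPass maps n m c →
        (pvBRound maps n m d' frontier dist).1.contains c = true) ∧
      (dist.keys.Nodup → (pvBRound maps n m d' frontier dist).1.keys.Nodup) := by
  intro frontier dist
  have main : ∀ (fr : List (Int × Int)) (acc : PySem.Dict (Int × Int) Int × List (Int × Int)),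
      ∃ news, (fr.foldl (fun acc c => (pvNbrs c.1 c.2).foldl (pvBStep maps n m d') acc) acc).2
          = acc.2 ++ news ∧
        (∀ c, (fr.foldl (fun acc c => (pvNbrs c.1 c.2).foldl (pvBStep maps n m d') acc) acc).1.get? c =
          if c ∈ news then some d' else acc.1.get? c) ∧
        (∀ c ∈ news, acc.1.contains c = false ∧ pvPass maps n m c ∧
          ∃ f ∈ fr, c ∈ pvNbrs f.1 f.2) ∧
        (∀ c, acc.1.contains c = true →
          (fr.foldl (fun acc c => (pvNbrs c.1 c.2).foldl (pvBStep maps n m d') acc) acc).1.contains c = true) ∧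
        (∀ c, (∃ f ∈ fr, c ∈ pvNbrs f.1 f.2) → pvPass maps n m c →
          (fr.foldl (fun acc c => (pvNbrs c.1 c.2).foldl (pvBStep maps n m d') acc) acc).1.contains c = true) ∧
        (acc.1.keys.Nodup →
          (fr.foldl (fun acc c => (pvNbrs c.1 c.2).foldl (pvBStep maps n m d') acc) acc).1.keys.Nodup) := by
    intro fr
    induction fr with
    | nil =>
      intro acc
      exact ⟨[], by simp, by simp, by simp, by simp, by simp, by simp⟩
    | cons f fr ih =>
      intro acc
      simp only [List.foldl_cons]
      rcases pvBStep_fold_char maps n m d' (pvNbrs f.1 f.2) acc with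
        ⟨news1, g1, g2, g3, g4, g5, g6⟩
      rcases ih ((pvNbrs f.1 f.2).foldl (pvBStep maps n m d') acc) with
        ⟨news2, h1, h2, h3, h4, h5, h6⟩
      refine ⟨news1 ++ news2, ?_, ?_, ?_, ?_, ?_, ?_⟩
      · rw [h1, g1]; simp
      · intro c
        rw [h2 c]
        by_cases hc2 : c ∈ news2
        · rw [if_pos hc2, if_pos (List.mem_append_right _ hc2)]
        · rw [if_neg hc2, g2 c]
          by_cases hc1 : c ∈ news1
          · rw [if_pos hc1, if_pos (List.mem_append_left _ hc1)]
          · rw [if_neg hc1, if_neg (by simp [hc1, hc2])]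
      · intro c hc
        rcases List.mem_append.mp hc with hc | hc
        · rcases g3 c hc with ⟨q1, q2, q3⟩
          exact ⟨q1, q2, f, List.mem_cons_self .., q3⟩
        · rcases h3 c hc with ⟨q1, q2, q3⟩
          refine ⟨?_, q2, ?_⟩
          · by_cases hco : acc.1.contains c = true
            · rw [g4 c hco] at q1; simp at q1
            · revert hco; cases acc.1.contains c <;> simp
          · rcases q3 with ⟨f', hf', hn⟩
            exact ⟨f', List.mem_cons_of_mem _ hf', hn⟩
      · intro c hc
        exact h4 c (g4 c hc)
      · intro c hc hpc
        rcases hc with ⟨f', hf', hn⟩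
        rcases List.mem_cons.mp hf' with hf' | hf'
        · subst hf'
          exact h4 c (g5 c hn hpc)
        · exact h5 c ⟨f', hf', hn⟩ hpc
      · intro hnd
        exact h6 (g6 hnd)
  rcases main frontier (dist, []) with ⟨news, h1, h2, h3, h4, h5, h6⟩
  exact ⟨news, by simpa [pvBRound] using h1, by simpa [pvBRound] using h2,
    by simpa using h3, fun c hex hp => by simpa [pvBRound] using h5 c hex hp,
    by simpa [pvBRound] using h6⟩

lemma pvGap (maps : List String) (n m : Int) (ch : Char) (d : ℕ)
    (hF : ∀ c : Int × Int, ¬ ((pvDSet maps n m ch c).Nonempty ∧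
        sInf (pvDSet maps n m ch c) = d)) :
    ∀ c : Int × Int, (pvDSet maps n m ch c).Nonempty → sInf (pvDSet maps n m ch c) ≤ d := by
  have hstep : ∀ k, d ≤ k → ∀ c : Int × Int, (pvDSet maps n m ch c).Nonempty →
      sInf (pvDSet maps n m ch c) ≠ k := by
    intro k
    induction k with
    | zero =>
      intro hk c hc
      have hd0 : d = 0 := by omega
      rw [← hd0]
      exact fun h => hF c ⟨hc, h⟩
    | succ k ihk =>
      intro hk c hc hck
      by_cases hdk : d = k + 1
      · exact hF c ⟨hc, by rw [hck, hdk]⟩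
      · have hdk' : d ≤ k := by omega
        rcases pvDist_succ_ex hc hck with ⟨f, hadj, hfne, hfd⟩
        exact ihk hdk' f hfne hfd
  intro c hc
  by_cases h : sInf (pvDSet maps n m ch c) ≤ d
  · exact h
  · exact absurd rfl (hstep _ (by omega) c hc)

lemma pvBfsLoop_spec (maps : List String) (n m : Int) (ch : Char) :
    ∀ (N : ℕ) (frontier : List (Int × Int)) (dist : PySem.Dict (Int × Int) Int) (d : ℕ),
      2 * pvUD n m dist + (if frontier = [] then 0 else 1) ≤ N →
      (∀ c : Int × Int, c ∈ frontier ↔ ((pvDSet maps n m ch c).Nonempty ∧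
        sInf (pvDSet maps n m ch c) = d)) →
      (∀ (c : Int × Int) (w : Int), dist.get? c = some w ↔
        ((pvDSet maps n m ch c).Nonempty ∧ sInf (pvDSet maps n m ch c) ≤ d ∧
          w = ((sInf (pvDSet maps n m ch c) : ℕ) : Int))) →
      dist.keys.Nodup →
      (∀ (c : Int × Int) (w : Int),
        (pvBfsLoop maps n m frontier dist (d : Int)).get? c = some w ↔
          ((pvDSet maps n m ch c).Nonempty ∧
            w = ((sInf (pvDSet maps n m ch c) : ℕ) : Int))) ∧
      (pvBfsLoop maps n m frontier dist (d : Int)).keys.Nodup := by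
  intro N
  induction N with
  | zero =>
    intro frontier dist d hm hF hD hnd
    rcases frontier with _ | ⟨c0, fr⟩
    · rw [pvBfsLoop]
      have hgap := pvGap maps n m ch d (fun c h => by
        have := (hF c).mpr h
        simp at this)
      refine ⟨fun c w => ?_, hnd⟩
      rw [hD c w]
      constructor
      · rintro ⟨ha, -, hb⟩; exact ⟨ha, hb⟩
      · rintro ⟨ha, hb⟩; exact ⟨ha, hgap c ha, hb⟩
    · exfalso
      simp only [if_neg (by simp : ¬(c0 :: fr = []))] at hm
      omega
  | succ N ih =>
    intro frontier dist d hm hF hD hnd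
    rcases hfr : frontier with _ | ⟨c0, fr⟩
    · rw [pvBfsLoop]
      have hgap := pvGap maps n m ch d (fun c h => by
        have := (hF c).mpr h
        rw [hfr] at this
        simp at this)
      refine ⟨fun c w => ?_, hnd⟩
      rw [hD c w]
      constructor
      · rintro ⟨ha, -, hb⟩; exact ⟨ha, hb⟩
      · rintro ⟨ha, hb⟩; exact ⟨ha, hgap c ha, hb⟩
    · rw [pvBfsLoop]
      rcases pvBRound_char maps n m ((d : Int) + 1) (c0 :: fr) dist with
        ⟨news, hr1, hr2, hr3, hr4, hr5⟩
      -- news is exactly the set of cells at distance d+1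
      have hnews : ∀ c : Int × Int, c ∈ news ↔ ((pvDSet maps n m ch c).Nonempty ∧
          sInf (pvDSet maps n m ch c) = d + 1) := by
        intro c
        constructor
        · intro hc
          rcases hr3 c hc with ⟨q1, q2, f, hf, hn⟩
          have hfF := (hF f).mp (by rw [hfr]; exact hf)
          have hadj : pvAdj maps n m f c :=
            ⟨pvDSet_pass hfF.1, q2, (pv_mem_nbrs f.1 f.2 c).mp hn⟩
          rcases pvDist_adj_le hadj hfF.1 with ⟨hcne, hcle⟩
          rw [hfF.2] at hcle
          have hnotle : ¬ (sInf (pvDSet maps n m ch c) ≤ d) := by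
            intro hle
            have : dist.get? c = some ((sInf (pvDSet maps n m ch c) : ℕ) : Int) :=
              (hD c _).mpr ⟨hcne, hle, rfl⟩
            have : dist.contains c = true := by
              rw [PySem.Dict.contains_eq_isSome_get?, this]
              rfl
            rw [q1] at this
            simp at this
          exact ⟨hcne, by omega⟩
        · rintro ⟨hcne, hcd⟩
          rcases pvDist_succ_ex hcne hcd with ⟨f, hadj, hfne, hfd⟩
          have hfF : f ∈ frontier := (hF f).mpr ⟨hfne, hfd⟩
          have hcont : (pvBRound maps n m ((d : Int) + 1) (c0 :: fr) dist).1.contains c = true := by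
            apply hr4 c
            · exact ⟨f, by rw [← hfr]; exact hfF, (pv_mem_nbrs f.1 f.2 c).mpr hadj.2.2⟩
            · exact hadj.2.1
          by_cases hcn : c ∈ news
          · exact hcn
          · exfalso
            have hg : (pvBRound maps n m ((d : Int) + 1) (c0 :: fr) dist).1.get? c
                = dist.get? c := by
              rw [hr2 c, if_neg hcn]
            have hdistc : dist.get? c = none := by
              cases hq : dist.get? c with
              | none => rfl
              | some w =>
                rcases (hD c w).mp hq with ⟨-, hle, -⟩
                omega
            rw [PySem.Dict.contains_eq_isSome_get?, hg, hdistc] at hcont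
            simp at hcont
      -- measure decrease
      have hmeas := pvBRound_meas maps n m ((d : Int) + 1) (c0 :: fr) dist
      have hrec := ih (pvBRound maps n m ((d : Int) + 1) (c0 :: fr) dist).2
        (pvBRound maps n m ((d : Int) + 1) (c0 :: fr) dist).1 (d + 1)
        (by
          have hm2 : 2 * pvUD n m dist + 1 ≤ N + 1 := by
            rw [hfr] at hm
            simpa using hm
          rw [hr1] at hmeas ⊢
          rcases hnw : news with _ | ⟨nc, news'⟩
          · rw [if_pos rfl]
            rw [hnw] at hmeas
            simp only [List.length_nil] at hmeas
            omega
          · rw [if_neg (by simp)]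
            rw [hnw] at hmeas
            simp only [List.length_cons] at hmeas
            omega)
        (by
          intro c
          rw [hr1, hnews c])
        (by
          intro c w
          rw [hr2 c]
          by_cases hcn : c ∈ news
          · rw [if_pos hcn]
            rcases (hnews c).mp hcn with ⟨hcne, hcd⟩
            constructor
            · intro hw
              refine ⟨hcne, by omega, ?_⟩
              rw [hcd, ← Option.some.inj hw]
              push_cast
              ring
            · rintro ⟨-, -, hw⟩
              rw [hw, hcd]
              push_cast
              ring_nf
          · rw [if_neg hcn]
            rw [hD c w]
            constructor
            · rintro ⟨ha, hle, hw⟩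
              exact ⟨ha, by omega, hw⟩
            · rintro ⟨ha, hle, hw⟩
              refine ⟨ha, ?_, hw⟩
              rcases Nat.lt_or_ge (sInf (pvDSet maps n m ch c)) (d + 1) with h | h
              · omega
              · exfalso
                have : sInf (pvDSet maps n m ch c) = d + 1 := by omega
                exact hcn ((hnews c).mpr ⟨ha, this⟩))
        (hr5 hnd)
      have hcast : ((d : Int) + 1) = (((d + 1 : ℕ)) : Int) := by push_cast; ring
      rw [← hcast] at hrec
      exact hrec

lemma pvCellsOf_mem (maps : List String) (n m : Int) (ch : Char) (c : Int × Int) :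
    c ∈ (PySem.List.pyRange 0 n 1).flatMap (fun i =>
      ((PySem.List.pyRange 0 m 1).filter (fun j => pvCell maps i j == ch)).map
        (fun j => (i, j))) ↔ pvSrc maps n m ch c := by
  simp only [List.mem_flatMap, List.mem_map, List.mem_filter, PySem.List.mem_pyRange_one]
  constructor
  · rintro ⟨i, ⟨hi0, hin⟩, j, ⟨⟨hj0, hjm⟩, hcell⟩, he⟩
    subst he
    exact ⟨hi0, hin, hj0, hjm, by simpa using hcell⟩
  · rintro ⟨h1, h2, h3, h4, h5⟩
    exact ⟨c.1, ⟨h1, h2⟩, c.2, ⟨⟨h3, h4⟩, by simpa using h5⟩, rfl⟩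

lemma pvInsert0_get? : ∀ (l : List (Int × Int)) (d0 : PySem.Dict (Int × Int) Int) (c : Int × Int),
    (l.foldl (fun d cc => d.insert cc (0 : Int)) d0).get? c =
      if c ∈ l then some 0 else d0.get? c := by
  intro l
  induction l with
  | nil => intro d0 c; simp
  | cons x l ih =>
    intro d0 c
    simp only [List.foldl_cons]
    rw [ih]
    by_cases hcl : c ∈ l
    · rw [if_pos hcl, if_pos (List.mem_cons_of_mem _ hcl)]
    · rw [if_neg hcl, PySem.Dict.get?_insert]
      by_cases hcx : c = x
      · rw [if_pos hcx, if_pos (by rw [hcx]; exact List.mem_cons_self ..)]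
      · rw [if_neg hcx, if_neg (by simp [hcx, hcl])]

lemma pvSrc_iff_dist0 {maps : List String} {n m : Int} {ch : Char} {c : Int × Int}
    (hch : ch ≠ 'X') :
    pvSrc maps n m ch c ↔
      ((pvDSet maps n m ch c).Nonempty ∧ sInf (pvDSet maps n m ch c) = 0) := by
  constructor
  · intro h
    have h0 : 0 ∈ pvDSet maps n m ch c := (pvDSet_zero_iff hch).mpr h
    exact ⟨⟨0, h0⟩, Nat.le_zero.mp (Nat.sInf_le h0)⟩
  · rintro ⟨hne, h0⟩
    have := Nat.sInf_mem hne
    rw [h0] at this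
    exact (pvDSet_zero_iff hch).mp this

lemma pvBfs_full (maps : List String) (n m : Int) (ch : Char) (hch : ch ≠ 'X') :
    (∀ (c : Int × Int) (w : Int),
      (pvBfsLoop maps n m
        ((PySem.List.pyRange 0 n 1).flatMap (fun i =>
          ((PySem.List.pyRange 0 m 1).filter (fun j => pvCell maps i j == ch)).map
            (fun j => (i, j))))
        (PySem.Dict.ofList
          (((PySem.List.pyRange 0 n 1).flatMap (fun i =>
            ((PySem.List.pyRange 0 m 1).filter (fun j => pvCell maps i j == ch)).map
              (fun j => (i, j)))).map (fun c => (c, (0 : Int))))) 0).get? c = some w ↔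
        ((pvDSet maps n m ch c).Nonempty ∧ w = ((sInf (pvDSet maps n m ch c) : ℕ) : Int))) ∧
    (pvBfsLoop maps n m
        ((PySem.List.pyRange 0 n 1).flatMap (fun i =>
          ((PySem.List.pyRange 0 m 1).filter (fun j => pvCell maps i j == ch)).map
            (fun j => (i, j))))
        (PySem.Dict.ofList
          (((PySem.List.pyRange 0 n 1).flatMap (fun i =>
            ((PySem.List.pyRange 0 m 1).filter (fun j => pvCell maps i j == ch)).map
              (fun j => (i, j)))).map (fun c => (c, (0 : Int))))) 0).keys.Nodup := by
  classical
  set srcs := (PySem.List.pyRange 0 n 1).flatMap (fun i =>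
    ((PySem.List.pyRange 0 m 1).filter (fun j => pvCell maps i j == ch)).map
      (fun j => (i, j))) with hsrcs
  have hd0get : ∀ c : Int × Int,
      (PySem.Dict.ofList (srcs.map (fun c => (c, (0 : Int))))).get? c =
        if c ∈ srcs then some 0 else none := by
    intro c
    have h1 : PySem.Dict.ofList (srcs.map (fun c => (c, (0 : Int)))) =
        srcs.foldl (fun d cc => d.insert cc (0 : Int)) PySem.Dict.empty := by
      show (srcs.map (fun c => (c, (0 : Int)))).foldl
          (fun d p => d.insert p.1 p.2) PySem.Dict.empty = _
      rw [List.foldl_map]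
    rw [h1, pvInsert0_get? srcs PySem.Dict.empty c]
    by_cases hc : c ∈ srcs
    · rw [if_pos hc, if_pos hc]
    · rw [if_neg hc, if_neg hc]
      exact PySem.Dict.get?_empty ..
  have hcast0 : ((0 : ℕ) : Int) = 0 := rfl
  have := pvBfsLoop_spec maps n m ch
    (2 * pvUD n m (PySem.Dict.ofList (srcs.map (fun c => (c, (0 : Int))))) +
      (if srcs = [] then 0 else 1))
    srcs (PySem.Dict.ofList (srcs.map (fun c => (c, (0 : Int))))) 0
    (le_refl _)
    (by
      intro c
      rw [pvCellsOf_mem maps n m ch c]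
      exact pvSrc_iff_dist0 hch)
    (by
      intro c w
      rw [hd0get c]
      by_cases hc : c ∈ srcs
      · rw [if_pos hc]
        have hsrc := (pvCellsOf_mem maps n m ch c).mp hc
        rcases (pvSrc_iff_dist0 hch).mp hsrc with ⟨hne, h0⟩
        constructor
        · intro hw
          refine ⟨hne, by omega, ?_⟩
          rw [h0, ← Option.some.inj hw]
          rfl
        · rintro ⟨-, -, hw⟩
          rw [hw, h0]
          rfl
      · rw [if_neg hc]
        constructor
        · intro h; simp at h
        · rintro ⟨hne, hle, -⟩
          exfalso
          apply hc
          rw [pvCellsOf_mem maps n m ch c]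
          exact (pvSrc_iff_dist0 hch).mpr ⟨hne, by omega⟩)
    (PySem.Dict.nodup_keys_ofList _)
  exact this

lemma pvAlt_eq_T (maps : List String) :
    solution_alt maps =
      pvOptMin (pvT maps (maps.length : Int)
          ((((PySem.List.pyGet? maps 0).getD "").toList.length : Int))) := by
  classical
  set n : Int := (maps.length : Int) with hn
  set m : Int := ((((PySem.List.pyGet? maps 0).getD "").toList.length : Int)) with hm
  obtain ⟨hdS, hndS⟩ := pvBfs_full maps n m 'S' (by decide)
  obtain ⟨hdE, hndE⟩ := pvBfs_full maps n m 'E' (by decide)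
  set dS := pvBfsLoop maps n m
      ((PySem.List.pyRange 0 n 1).flatMap (fun i =>
        ((PySem.List.pyRange 0 m 1).filter (fun j => pvCell maps i j == 'S')).map
          (fun j => (i, j))))
      (PySem.Dict.ofList
        (((PySem.List.pyRange 0 n 1).flatMap (fun i =>
          ((PySem.List.pyRange 0 m 1).filter (fun j => pvCell maps i j == 'S')).map
            (fun j => (i, j)))).map (fun c => (c, (0 : Int))))) 0 with hdSdef
  set dE := pvBfsLoop maps n m
      ((PySem.List.pyRange 0 n 1).flatMap (fun i =>
        ((PySem.List.pyRange 0 m 1).filter (fun j => pvCell maps i j == 'E')).map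
          (fun j => (i, j))))
      (PySem.Dict.ofList
        (((PySem.List.pyRange 0 n 1).flatMap (fun i =>
          ((PySem.List.pyRange 0 m 1).filter (fun j => pvCell maps i j == 'E')).map
            (fun j => (i, j)))).map (fun c => (c, (0 : Int))))) 0 with hdEdef
  have hsol : solution_alt maps = dS.items.foldl (fun best it =>
      if pvCell maps it.1.1 it.1.2 = 'L' ∧ dE.contains it.1 = true then
        (if best = -1 ∨ it.2 + (dE.get? it.1).getD 0 < best
         then it.2 + (dE.get? it.1).getD 0 else best)
      else best) (-1) := rfl
  rw [hsol]
  have hnn : ∀ it ∈ dS.items,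
      (pvCell maps it.1.1 it.1.2 = 'L' ∧ dE.contains it.1 = true) →
      0 ≤ it.2 + (dE.get? it.1).getD 0 := by
    rintro it hit ⟨-, hcont⟩
    have hget : dS.get? it.1 = some it.2 := PySem.Dict.get?_of_mem_items _ hit hndS
    rcases (hdS it.1 it.2).mp hget with ⟨-, hw⟩
    have hE : (dE.get? it.1).isSome := by
      rw [← PySem.Dict.contains_eq_isSome_get?, hcont]
    rcases Option.isSome_iff_exists.mp hE with ⟨w, hwE⟩
    rcases (hdE it.1 w).mp hwE with ⟨-, hw2⟩
    rw [hwE]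
    simp only [Option.getD_some]
    rw [hw, hw2]
    positivity
  have hfold := pvFoldMin
    (fun it : (Int × Int) × Int => pvCell maps it.1.1 it.1.2 = 'L' ∧ dE.contains it.1 = true)
    (fun it : (Int × Int) × Int => it.2 + (dE.get? it.1).getD 0)
    dS.items hnn ∅
  rw [pvOptMin_empty] at hfold
  rw [hfold]
  congr 1
  rw [Set.empty_union]
  ext t
  simp only [Set.mem_setOf_eq]
  constructor
  · rintro ⟨a, ha, ⟨hL, hcont⟩, hval⟩
    have hget : dS.get? a.1 = some a.2 := PySem.Dict.get?_of_mem_items _ ha hndS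
    rcases (hdS a.1 a.2).mp hget with ⟨hNS, hwS⟩
    have hE : (dE.get? a.1).isSome := by
      rw [← PySem.Dict.contains_eq_isSome_get?, hcont]
    rcases Option.isSome_iff_exists.mp hE with ⟨w, hwE⟩
    rcases (hdE a.1 w).mp hwE with ⟨hNE, hwE2⟩
    have hpassa : pvPass maps n m a.1 := pvDSet_pass hNS
    refine ⟨a.1, ⟨hpassa.1, hpassa.2.1, hpassa.2.2.1, hpassa.2.2.2.1, hL⟩, hNS, hNE, ?_⟩
    rw [hwE] at hval
    simp only [Option.getD_some] at hval
    rw [hwS, hwE2] at hval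
    have : ((sInf (pvDSet maps n m 'S' a.1) + sInf (pvDSet maps n m 'E' a.1) : ℕ) : ℤ)
        = ((t : ℕ) : ℤ) := by push_cast; omega
    exact_mod_cast this.symm
  · rintro ⟨c, hsrcL, hNS, hNE, ht⟩
    have hgetS : dS.get? c = some ((sInf (pvDSet maps n m 'S' c) : ℕ) : Int) :=
      (hdS c _).mpr ⟨hNS, rfl⟩
    have hgetE : dE.get? c = some ((sInf (pvDSet maps n m 'E' c) : ℕ) : Int) :=
      (hdE c _).mpr ⟨hNE, rfl⟩
    refine ⟨(c, ((sInf (pvDSet maps n m 'S' c) : ℕ) : Int)),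
      PySem.Dict.mem_items_of_get?_eq_some _ hgetS, ⟨hsrcL.2.2.2.2, ?_⟩, ?_⟩
    · rw [PySem.Dict.contains_eq_isSome_get?, hgetE]
      rfl
    · simp only
      rw [hgetE]
      simp only [Option.getD_some]
      rw [ht]
      push_cast
      ring

-- ===== VERDICT (by name: the statement is the Claim_ definition above) =====
theorem solution_spec : Claim_equal_solution := by
  intro maps _ hpre
  unfold Spec_solution
  rw [pvAns_init_eq maps, pvAlt_eq_T maps]
  rcases pvAnsSet_eq_T maps (maps.length : Int)
      ((((PySem.List.pyGet? maps 0).getD "").toList.length : Int)) with ⟨hne, hinf⟩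
  exact pvOptMin_congr _ _ hne hinf
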